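-- pv_equiv track=rewrite | github.com/9sub/Algorithm | 프로그래머스/lv2/154540. 무인도 여행/무인도 여행.py | solution
-- ===== SOURCE A (Python) =====
-- from collections import deque
--
-- def solution(maps):
--     answer = []
--     n = len(maps)
--     m = len(maps[0])
--     visit = [[False]*m for _ in range(n)]
--     for i in range(n):
--         for j in range(m):
--             if visit[i][j] == False and maps[i][j] != 'X':
--                 answer.append(bfs(maps, visit,n,m,i,j))
--     if not answer:
--         return [-1]
--     answer.sort()
--     return answer
--
-- def bfs(maps,visit,n,m,i,j):
--     dx = [-1,1,0,0]
--     dy = [0,0,-1,1]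
--     que = deque()
--     que.append((i,j))
--     visit[i][j] = True
--     days=0
--     while que:
--         x,y = que.popleft()
--         days+=int(maps[x][y])
--         for i in range(4):
--             nx = dx[i]+x
--             ny = dy[i]+y
--             if 0<=nx<n and 0<=ny<m and visit[nx][ny] == False and maps[nx][ny] !='X':
--                 que.append((nx,ny))
--                 visit[nx][ny]=True
--     return days
-- ===== SOURCE B (Python) =====
-- def find(parent, k):
--     while parent[k] != k:
--         k = parent[k]
--     return k
--
--
-- def union(parent, a, b):
--     ra = find(parent, a)
--     rb = find(parent, b)
--     if ra < rb:
--         parent[rb] = ra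
--     elif rb < ra:
--         parent[ra] = rb
--
--
-- def solution(maps):
--     n = len(maps)
--     m = len(maps[0])
--     parent = list(range(n * m))
--     for i in range(n):
--         for j in range(m):
--             if maps[i][j] != 'X':
--                 if j + 1 < m and maps[i][j + 1] != 'X':
--                     union(parent, i * m + j, i * m + j + 1)
--                 if i + 1 < n and maps[i + 1][j] != 'X':
--                     union(parent, i * m + j, (i + 1) * m + j)
--     sums = {}
--     for i in range(n):
--         for j in range(m):
--             if maps[i][j] != 'X':
--                 r = find(parent, i * m + j)
--                 sums[r] = sums.get(r, 0) + int(maps[i][j])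
--     answer = sorted(sums.values())
--     return answer if answer else [-1]
-- ===== Notes on version B (the rewrite author's own statement) =====
-- stated objective: alternative
-- what changed: Replaces the BFS flood fill with a mutable visited matrix and per-island queue traversal by a disjoint-set (union-find with union-by-smaller-root): one pass unions each non-'X' cell with its right and down neighbours, a second pass groups int(cell) sums into a dict keyed by find(root), and the dict's values are sorted (or [-1] if none).
import Mathlib
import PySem

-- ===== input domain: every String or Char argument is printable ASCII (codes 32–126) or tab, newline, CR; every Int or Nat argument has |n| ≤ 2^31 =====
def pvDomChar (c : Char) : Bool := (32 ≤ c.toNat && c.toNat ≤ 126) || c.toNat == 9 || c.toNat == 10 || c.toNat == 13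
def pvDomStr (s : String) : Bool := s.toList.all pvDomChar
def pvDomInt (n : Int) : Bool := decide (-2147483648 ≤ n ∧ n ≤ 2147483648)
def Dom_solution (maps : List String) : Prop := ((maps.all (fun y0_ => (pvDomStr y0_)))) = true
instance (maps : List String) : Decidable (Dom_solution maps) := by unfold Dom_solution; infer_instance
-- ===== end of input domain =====

-- B replaces A's per-island BFS flood fill (mutable visited matrix + deque) by a disjoint-set
-- (union-find): one pass unions each non-'X' cell with its good right/down neighbours, a second
-- pass groups the cell values into a dict keyed by find(root), whose values are then sorted.

-- maps[x][y] (both ports index only in-bounds positions; the 'X' default is never reached inside Pre_)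
def pvCharAt (maps : List String) (x y : Int) : Char :=
  ((PySem.List.pyGet? maps x).bind (fun s => PySem.Str.pyGet? s y)).getD 'X'

-- int(maps[x][y]); inside Pre_ the character is a decimal digit, so ofStr? always returns some
def pvVal (maps : List String) (x y : Int) : Int :=
  (PySem.Int.ofStr? (String.ofList [pvCharAt maps x y])).getD 0

-- ===== PORT A =====
-- the while-loop of bfs(); fuel only makes the recursion structural, it is never exhausted
def pvBfsLoop (maps : List String) (n m : Int) :
    Nat → Finset (Int × Int) → List (Int × Int) → Int → Int × Finset (Int × Int)
  | 0, visit, _, days => (days, visit)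
  | Nat.succ fuel, visit, que, days =>
    match que with
    | [] => (days, visit)
    | (x, y) :: rest =>
      let days' := days + pvVal maps x y
      let st := [((-1 : Int), (0 : Int)), (1, 0), (0, -1), (0, 1)].foldl
        (fun (st : Finset (Int × Int) × List (Int × Int)) d =>
          let nx := d.1 + x
          let ny := d.2 + y
          if 0 ≤ nx ∧ nx < n ∧ 0 ≤ ny ∧ ny < m ∧ (nx, ny) ∉ st.1 ∧ pvCharAt maps nx ny ≠ 'X'
          then (insert (nx, ny) st.1, st.2 ++ [(nx, ny)])
          else st) (visit, rest)
      pvBfsLoop maps n m fuel st.1 st.2 days'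

def pvBfs (maps : List String) (n m : Int) (visit : Finset (Int × Int)) (i j : Int) :
    Int × Finset (Int × Int) :=
  pvBfsLoop maps n m (2 * (n.toNat * m.toNat) + 1) (insert (i, j) visit) [(i, j)] 0

def solution (maps : List String) : List Int :=
  let n : Int := maps.length
  let m : Int := PySem.Str.len ((PySem.List.pyGet? maps 0).getD "")
  let res := (PySem.List.pyRange 0 n 1).foldl
    (fun (st : Finset (Int × Int) × List Int) i =>
      (PySem.List.pyRange 0 m 1).foldl
        (fun (st : Finset (Int × Int) × List Int) j =>
          if (i, j) ∉ st.1 ∧ pvCharAt maps i j ≠ 'X' then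
            let r := pvBfs maps n m st.1 i j
            (r.2, st.2 ++ [r.1])
          else st) st) (∅, [])
  if res.2 = [] then [-1] else PySem.List.sorted res.2 (fun v => v) false

-- ===== PORT B =====
-- parent[k]; both passes only use indices 0 ≤ k < len(parent)
def pvPar (p : List Int) (k : Int) : Int := p.getD k.toNat 0

-- find(parent, k): follow parent pointers to the root; the fuel len(parent) bounds the chain
-- (parents strictly decrease, see ufFind_root below), it is never exhausted
def ufFind (p : List Int) : Nat → Int → Int
  | 0, k => k
  | fuel + 1, k => if pvPar p k = k then k else ufFind p fuel (pvPar p k)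

-- union(parent, a, b): attach the larger root below the smaller
def ufUnion (p : List Int) (a b : Int) : List Int :=
  let ra := ufFind p p.length a
  let rb := ufFind p p.length b
  if ra < rb then p.set rb.toNat ra
  else if rb < ra then p.set ra.toNat rb
  else p

def solution_alt (maps : List String) : List Int :=
  let n : Int := maps.length
  let m : Int := PySem.Str.len ((PySem.List.pyGet? maps 0).getD "")
  let parent0 : List Int := PySem.List.pyRange 0 (n * m) 1
  let parent := (PySem.List.pyRange 0 n 1).foldl (fun (p : List Int) i =>
    (PySem.List.pyRange 0 m 1).foldl (fun (p : List Int) j =>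
      if pvCharAt maps i j ≠ 'X' then
        let p := if j + 1 < m ∧ pvCharAt maps i (j + 1) ≠ 'X'
          then ufUnion p (i * m + j) (i * m + j + 1) else p
        if i + 1 < n ∧ pvCharAt maps (i + 1) j ≠ 'X'
          then ufUnion p (i * m + j) ((i + 1) * m + j) else p
      else p) p) parent0
  let sums := (PySem.List.pyRange 0 n 1).foldl (fun (d : PySem.Dict Int Int) i =>
    (PySem.List.pyRange 0 m 1).foldl (fun (d : PySem.Dict Int Int) j =>
      if pvCharAt maps i j ≠ 'X' then
        let r := ufFind parent parent.length (i * m + j)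
        d.insert r (d.getD r 0 + pvVal maps i j)
      else d) d) PySem.Dict.empty
  let answer := PySem.List.sorted sums.values (fun v => v) false
  if answer ≠ [] then answer else [-1]

-- ===== PRECONDITION & SPEC =====
-- Pre_ excludes exactly the inputs on which A raises: empty maps (IndexError on maps[0]),
-- a row shorter than the first row (IndexError), or a character other than 'X'/digit in the
-- first m columns (ValueError in int()).
def Pre_solution (maps : List String) : Prop :=
  maps ≠ [] ∧ ∀ s ∈ maps, maps.headI.length ≤ s.length ∧
    ∀ j : Nat, j < maps.headI.length →
      (s.toList.getD j 'X' = 'X' ∨ (s.toList.getD j 'X').isDigit)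

instance (maps : List String) : Decidable (Pre_solution maps) := by
  unfold Pre_solution; infer_instance

def pvWitness_solution : List String := ["1X9", "X71"]

def Spec_solution (maps : List String) (out : List Int) : Prop := out = solution_alt maps
instance (maps : List String) (out : List Int) : Decidable (Spec_solution maps out) := by unfold Spec_solution; infer_instance

-- ===== CLAIM (what is proved, stated in full; the proofs are below) =====
def Claim_equal_solution : Prop := ∀ (maps : List String), Dom_solution maps → Pre_solution maps → Spec_solution maps (solution maps)

-- ===== LEMMAS AND PROOFS =====

-- a cell is inside the grid and not 'X'
abbrev pvGoodP (maps : List String) (n m : Int) (c : Int × Int) : Prop :=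
  0 ≤ c.1 ∧ c.1 < n ∧ 0 ≤ c.2 ∧ c.2 < m ∧ pvCharAt maps c.1 c.2 ≠ 'X'

def pvNbrs (c : Int × Int) : List (Int × Int) :=
  [(c.1 - 1, c.2), (c.1 + 1, c.2), (c.1, c.2 - 1), (c.1, c.2 + 1)]

-- one adjacency step between good cells, and connectivity
def pvAdj (maps : List String) (n m : Int) (c d : Int × Int) : Prop :=
  pvGoodP maps n m c ∧ pvGoodP maps n m d ∧ d ∈ pvNbrs c

def pvConn (maps : List String) (n m : Int) : Int × Int → Int × Int → Prop :=
  Relation.ReflTransGen (pvAdj maps n m)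

-- the grid cells in scan order, and the good ones
def pvCells (n m : Int) : List (Int × Int) :=
  (PySem.List.pyRange 0 n 1).flatMap (fun i => (PySem.List.pyRange 0 m 1).map (fun j => (i, j)))

def pvGCells (maps : List String) (n m : Int) : List (Int × Int) :=
  (pvCells n m).filter (fun c => decide (pvGoodP maps n m c))

-- the connected component of c as a Finset
noncomputable def pvCompF (maps : List String) (n m : Int) (c : Int × Int) : Finset (Int × Int) :=
  @Finset.filter _ (fun x => pvConn maps n m c x) (fun _ => Classical.dec _)
    (pvGCells maps n m).toFinset

def pvEnc (m : Int) (c : Int × Int) : Int := c.1 * m + c.2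

-- ============ A-side: BFS characterised by reachability ============

def gstep (maps : List String) (n m : Int)
    (push : List (Int × Int) → (Int × Int) → List (Int × Int))
    (st : Finset (Int × Int) × List (Int × Int)) (c : Int × Int) :
    Finset (Int × Int) × List (Int × Int) :=
  if 0 ≤ c.1 ∧ c.1 < n ∧ 0 ≤ c.2 ∧ c.2 < m ∧ c ∉ st.1 ∧ pvCharAt maps c.1 c.2 ≠ 'X'
  then (insert c st.1, push st.2 c)
  else st

def gLoop (maps : List String) (n m : Int)
    (push : List (Int × Int) → (Int × Int) → List (Int × Int)) :
    Nat → Finset (Int × Int) → List (Int × Int) → Int → Int × Finset (Int × Int)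
  | 0, V, _, acc => (acc, V)
  | Nat.succ fuel, V, Q, acc =>
    match Q with
    | [] => (acc, V)
    | c :: rest =>
      let st := (pvNbrs c).foldl (gstep maps n m push) (V, rest)
      gLoop maps n m push fuel st.1 st.2 (acc + pvVal maps c.1 c.2)

lemma bfs_eq_gLoop (maps : List String) (n m : Int) :
    ∀ (fuel : Nat) (V : Finset (Int × Int)) (Q : List (Int × Int)) (acc : Int),
      pvBfsLoop maps n m fuel V Q acc = gLoop maps n m (fun Q c => Q ++ [c]) fuel V Q acc := by
  intro fuel
  induction fuel with
  | zero => intro V Q acc; rfl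
  | succ fuel ih =>
    intro V Q acc
    match Q with
    | [] => rfl
    | (x, y) :: rest =>
      simp only [pvBfsLoop, gLoop, pvNbrs]
      rw [show ([((-1 : Int), (0 : Int)), (1, 0), (0, -1), (0, 1)].foldl
        (fun (st : Finset (Int × Int) × List (Int × Int)) d =>
          let nx := d.1 + x
          let ny := d.2 + y
          if 0 ≤ nx ∧ nx < n ∧ 0 ≤ ny ∧ ny < m ∧ (nx, ny) ∉ st.1 ∧ pvCharAt maps nx ny ≠ 'X'
          then (insert (nx, ny) st.1, st.2 ++ [(nx, ny)])
          else st) (V, rest))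
        = ([(x - 1, y), (x + 1, y), (x, y - 1), (x, y + 1)].foldl
            (fun (st : Finset (Int × Int) × List (Int × Int)) c =>
              if 0 ≤ c.1 ∧ c.1 < n ∧ 0 ≤ c.2 ∧ c.2 < m ∧ c ∉ st.1 ∧ pvCharAt maps c.1 c.2 ≠ 'X'
              then (insert c st.1, st.2 ++ [c])
              else st) (V, rest)) from by
        rw [show ([(x - 1, y), (x + 1, y), (x, y - 1), (x, y + 1)] : List (Int × Int))
            = [((-1 : Int), (0 : Int)), (1, 0), (0, -1), (0, 1)].map (fun d => (d.1 + x, d.2 + y)) from by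
          simp [Prod.ext_iff]; omega]
        rw [List.foldl_map]]
      exact ih _ _ _

-- one step of the relation underlying the search: d is a good unvisited neighbour of c
def pvRel (maps : List String) (n m : Int) (V : Finset (Int × Int)) (c d : Int × Int) : Prop :=
  pvGoodP maps n m d ∧ d ∉ V ∧ d ∈ pvNbrs c

-- everything reachable from the worklist Q through cells not yet visited
def pvRS (maps : List String) (n m : Int) (V : Finset (Int × Int)) (Q : List (Int × Int)) :
    Set (Int × Int) :=
  {x | ∃ q ∈ Q, Relation.ReflTransGen (pvRel maps n m V) q x}

noncomputable def pvRF (maps : List String) (n m : Int) (V : Finset (Int × Int))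
    (Q : List (Int × Int)) : Finset (Int × Int) :=
  @Finset.filter _ (fun c => c ∈ pvRS maps n m V Q) (fun _ => Classical.dec _)
    (Q.toFinset ∪ (Finset.Icc 0 (n - 1)) ×ˢ (Finset.Icc 0 (m - 1)))

lemma mem_pvRF (maps : List String) (n m : Int) (V : Finset (Int × Int))
    (Q : List (Int × Int)) (x : Int × Int) :
    x ∈ pvRF maps n m V Q ↔ x ∈ pvRS maps n m V Q := by
  classical
  unfold pvRF
  rw [Finset.mem_filter]
  constructor
  · exact fun h => h.2
  · intro h
    refine ⟨?_, h⟩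
    obtain ⟨q, hq, hpath⟩ := h
    rcases (Relation.ReflTransGen.cases_tail hpath) with heq | ⟨y, _, hstep⟩
    · subst heq
      exact Finset.mem_union_left _ (List.mem_toFinset.mpr hq)
    · obtain ⟨⟨h1, h2, h3, h4, _⟩, _, _⟩ := hstep
      refine Finset.mem_union_right _ ?_
      rw [Finset.mem_product]
      constructor <;> rw [Finset.mem_Icc] <;> omega

def pvInv (maps : List String) (n m : Int) (V : Finset (Int × Int))
    (Q : List (Int × Int)) : Prop :=
  Q.Nodup ∧ ∀ c ∈ Q, pvGoodP maps n m c ∧ c ∈ V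

lemma fold_step (maps : List String) (n m : Int)
    (push : List (Int × Int) → (Int × Int) → List (Int × Int))
    (hpush : ∀ (Q : List (Int × Int)) c, (push Q c).Perm (c :: Q)) :
    ∀ (L : List (Int × Int)) (V₀ : Finset (Int × Int)) (Q₀ : List (Int × Int)),
      (∀ q ∈ Q₀, pvGoodP maps n m q ∧ q ∈ V₀) → Q₀.Nodup →
      (L.foldl (gstep maps n m push) (V₀, Q₀)).1
          = V₀ ∪ (L.filter (fun d => decide (pvGoodP maps n m d ∧ d ∉ V₀))).toFinset ∧
      (L.foldl (gstep maps n m push) (V₀, Q₀)).2.toFinset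
          = Q₀.toFinset ∪ (L.filter (fun d => decide (pvGoodP maps n m d ∧ d ∉ V₀))).toFinset ∧
      (L.foldl (gstep maps n m push) (V₀, Q₀)).2.Nodup ∧
      (∀ q ∈ (L.foldl (gstep maps n m push) (V₀, Q₀)).2,
          pvGoodP maps n m q ∧ q ∈ (L.foldl (gstep maps n m push) (V₀, Q₀)).1) := by
  intro L
  induction L with
  | nil =>
    intro V₀ Q₀ hq hnd
    refine ⟨by simp, by simp, hnd, fun q hqm => hq q hqm⟩
  | cons d L ih =>
    intro V₀ Q₀ hq hnd
    by_cases hg : pvGoodP maps n m d ∧ d ∉ V₀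
    · have hstep : gstep maps n m push (V₀, Q₀) d = (insert d V₀, push Q₀ d) := by
        unfold gstep
        rw [if_pos]
        obtain ⟨⟨h1, h2, h3, h4, h5⟩, h6⟩ := hg
        exact ⟨h1, h2, h3, h4, h6, h5⟩
      have hmem : ∀ q, q ∈ push Q₀ d ↔ q = d ∨ q ∈ Q₀ := by
        intro q
        rw [(hpush Q₀ d).mem_iff, List.mem_cons]
      have hdnot : d ∉ Q₀ := fun hd => hg.2 (hq d hd).2
      have hnd' : (push Q₀ d).Nodup := ((List.nodup_cons.mpr ⟨hdnot, hnd⟩).perm (hpush Q₀ d).symm)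
      have hq' : ∀ q ∈ push Q₀ d, pvGoodP maps n m q ∧ q ∈ insert d V₀ := by
        intro q hqm
        rcases (hmem q).mp hqm with h | h
        · subst h; exact ⟨hg.1, Finset.mem_insert_self _ _⟩
        · exact ⟨(hq q h).1, Finset.mem_insert_of_mem (hq q h).2⟩
      obtain ⟨c1, c2, c3, c4⟩ := ih (insert d V₀) (push Q₀ d) hq' hnd'
      have hfilter : ∀ x, (x ∈ ((d :: L).filter (fun e => decide (pvGoodP maps n m e ∧ e ∉ V₀)))) ↔
          (x = d ∨ x ∈ (L.filter (fun e => decide (pvGoodP maps n m e ∧ e ∉ insert d V₀)))) := by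
        intro x
        simp only [List.mem_filter, List.mem_cons, decide_eq_true_eq, Finset.mem_insert]
        constructor
        · rintro ⟨h | h, hx⟩
          · exact Or.inl h
          · by_cases hxd : x = d
            · exact Or.inl hxd
            · exact Or.inr ⟨h, hx.1, fun hc => (hc.elim hxd hx.2)⟩
        · rintro (h | ⟨h1, h2, h3⟩)
          · subst h; exact ⟨Or.inl rfl, hg⟩
          · exact ⟨Or.inr h1, h2, fun hc => h3 (Or.inr hc)⟩
      refine ⟨?_, ?_, ?_, ?_⟩
      · rw [List.foldl_cons, hstep, c1]
        ext x
        simp only [Finset.mem_union, Finset.mem_insert, List.mem_toFinset, hfilter x]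
        tauto
      · rw [List.foldl_cons, hstep, c2]
        ext x
        have hxq : x ∈ (push Q₀ d).toFinset ↔ x = d ∨ x ∈ Q₀ := by
          rw [List.mem_toFinset]; exact hmem x
        simp only [Finset.mem_union, List.mem_toFinset, hfilter x, hxq]
        tauto
      · rw [List.foldl_cons, hstep]; exact c3
      · rw [List.foldl_cons, hstep]; exact c4
    · have hstep : gstep maps n m push (V₀, Q₀) d = (V₀, Q₀) := by
        unfold gstep
        rw [if_neg]
        intro ⟨h1, h2, h3, h4, h6, h5⟩
        exact hg ⟨⟨h1, h2, h3, h4, h5⟩, h6⟩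
      obtain ⟨c1, c2, c3, c4⟩ := ih V₀ Q₀ hq hnd
      have hfilter : ((d :: L).filter (fun e => decide (pvGoodP maps n m e ∧ e ∉ V₀)))
          = (L.filter (fun e => decide (pvGoodP maps n m e ∧ e ∉ V₀))) := by
        rw [List.filter_cons_of_neg]
        simpa using hg
      rw [List.foldl_cons, hstep, hfilter]
      exact ⟨c1, c2, c3, c4⟩

lemma RS_step (maps : List String) (n m : Int) (V : Finset (Int × Int))
    (c : Int × Int) (rest : List (Int × Int)) (F : Finset (Int × Int))
    (Q' : List (Int × Int))
    (hInv : pvInv maps n m V (c :: rest))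
    (hF : ∀ d, d ∈ F ↔ pvRel maps n m V c d)
    (hQ' : ∀ q, q ∈ Q' ↔ q ∈ rest ∨ q ∈ F) :
    pvRS maps n m (V ∪ F) Q' = pvRS maps n m V (c :: rest) \ {c} := by
  obtain ⟨hnd, hmemInv⟩ := hInv
  have hcV : c ∈ V := (hmemInv c (List.mem_cons_self)).2
  have hmono : ∀ a b, pvRel maps n m (V ∪ F) a b → pvRel maps n m V a b := by
    rintro a b ⟨hgb, hbv, hbn⟩
    exact ⟨hgb, fun h => hbv (Finset.mem_union_left _ h), hbn⟩
  ext x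
  simp only [pvRS, Set.mem_setOf_eq, Set.mem_diff, Set.mem_singleton_iff]
  constructor
  · rintro ⟨q, hq, hpath⟩
    have hpathV : Relation.ReflTransGen (pvRel maps n m V) q x :=
      Relation.ReflTransGen.mono (fun a b h => hmono a b h) hpath
    have hxne : x ≠ c := by
      rcases Relation.ReflTransGen.cases_tail hpath with heq | ⟨y, _, hstep⟩
      · subst heq
        rcases (hQ' x).mp hq with h | h
        · exact fun hxc => (List.nodup_cons.mp hnd).1 (hxc ▸ h)
        · exact fun hxc => ((hF x).mp h).2.1 (hxc ▸ hcV)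
      · intro hxc
        exact hstep.2.1 (Finset.mem_union_left _ (hxc ▸ hcV))
    refine ⟨?_, hxne⟩
    rcases (hQ' q).mp hq with h | h
    · exact ⟨q, List.mem_cons_of_mem _ h, hpathV⟩
    · exact ⟨c, List.mem_cons_self, Relation.ReflTransGen.head ((hF q).mp h) hpathV⟩
  · rintro ⟨⟨q, hq, hpath⟩, hxne⟩
    have key : ∀ y, Relation.ReflTransGen (pvRel maps n m V) q y → y ≠ c →
        ∃ z, z ∈ Q' ∧ Relation.ReflTransGen (pvRel maps n m (V ∪ F)) z y := by
      intro y hp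
      induction hp with
      | refl =>
        intro hqc
        rcases List.mem_cons.mp hq with h | h
        · exact absurd h hqc
        · exact ⟨q, (hQ' q).mpr (Or.inl h), Relation.ReflTransGen.refl⟩
      | tail hp hstep ih =>
        rename_i b a
        intro hane
        by_cases haF : a ∈ F
        · exact ⟨a, (hQ' a).mpr (Or.inr haF), Relation.ReflTransGen.refl⟩
        · have hbne : b ≠ c := by
            intro hbc
            subst hbc
            exact haF ((hF a).mpr hstep)
          obtain ⟨z, hz, hzp⟩ := ih hbne
          have hstep' : pvRel maps n m (V ∪ F) b a := by
            obtain ⟨hga, hav, han⟩ := hstep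
            refine ⟨hga, ?_, han⟩
            intro hc
            rcases Finset.mem_union.mp hc with h | h
            · exact hav h
            · exact haF h
          exact ⟨z, hz, hzp.tail hstep'⟩
    obtain ⟨z, hz, hzp⟩ := key x hpath hxne
    exact ⟨z, hz, hzp⟩

lemma gLoop_spec (maps : List String) (n m : Int)
    (push : List (Int × Int) → (Int × Int) → List (Int × Int))
    (hpush : ∀ (Q : List (Int × Int)) c, (push Q c).Perm (c :: Q)) :
    ∀ (fuel : Nat) (V : Finset (Int × Int)) (Q : List (Int × Int)) (acc : Int),
      pvInv maps n m V Q → (pvRF maps n m V Q).card ≤ fuel →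
      gLoop maps n m push fuel V Q acc
        = (acc + ∑ c ∈ pvRF maps n m V Q, pvVal maps c.1 c.2, V ∪ pvRF maps n m V Q) := by
  have hnil : ∀ V : Finset (Int × Int), pvRF maps n m V [] = ∅ := by
    intro V
    ext x
    simp [mem_pvRF, pvRS]
  intro fuel
  induction fuel with
  | zero =>
    intro V Q acc hInv hcard
    have hRF : pvRF maps n m V Q = ∅ := Finset.card_eq_zero.mp (Nat.le_zero.mp hcard)
    cases Q with
    | nil => simp [gLoop, hRF]
    | cons c rest =>
      exfalso
      have hc : c ∈ pvRF maps n m V (c :: rest) :=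
        (mem_pvRF maps n m V _ c).mpr ⟨c, List.mem_cons_self, Relation.ReflTransGen.refl⟩
      rw [hRF] at hc
      exact absurd hc (Finset.notMem_empty c)
  | succ fuel ih =>
    intro V Q acc hInv hcard
    cases Q with
    | nil => simp [gLoop, hnil]
    | cons c rest =>
      obtain ⟨c1, c2, c3, c4⟩ := fold_step maps n m push hpush (pvNbrs c) V rest
          (fun q hq => hInv.2 q (List.mem_cons_of_mem _ hq)) ((List.nodup_cons.mp hInv.1).2)
      set Fl := ((pvNbrs c).filter (fun d => decide (pvGoodP maps n m d ∧ d ∉ V))) with hFl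
      set st := ((pvNbrs c).foldl (gstep maps n m push) (V, rest)) with hst
      have hcV : c ∈ V := (hInv.2 c List.mem_cons_self).2
      have hF : ∀ d, d ∈ Fl.toFinset ↔ pvRel maps n m V c d := by
        intro d
        simp only [Fl, List.mem_toFinset, List.mem_filter, decide_eq_true_eq, pvRel]
        tauto
      have hQ' : ∀ q, q ∈ st.2 ↔ q ∈ rest ∨ q ∈ Fl.toFinset := by
        intro q
        rw [← List.mem_toFinset, c2]
        simp
      have hRS := RS_step maps n m V c rest Fl.toFinset st.2 hInv hF hQ'
      have hc : c ∈ pvRF maps n m V (c :: rest) :=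
        (mem_pvRF maps n m V _ c).mpr ⟨c, List.mem_cons_self, Relation.ReflTransGen.refl⟩
      have hRF : pvRF maps n m st.1 st.2 = (pvRF maps n m V (c :: rest)).erase c := by
        ext x
        rw [mem_pvRF, Finset.mem_erase, mem_pvRF, c1, hRS]
        simp only [Set.mem_diff, Set.mem_singleton_iff]
        tauto
      have hcard' : (pvRF maps n m st.1 st.2).card ≤ fuel := by
        rw [hRF, Finset.card_erase_of_mem hc]
        omega
      have hInv' : pvInv maps n m st.1 st.2 := ⟨c3, c4⟩
      have hFsub : ∀ x ∈ Fl.toFinset, x ∈ pvRF maps n m V (c :: rest) := by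
        intro x hx
        exact (mem_pvRF maps n m V _ x).mpr
          ⟨c, List.mem_cons_self, Relation.ReflTransGen.single ((hF x).mp hx)⟩
      show gLoop maps n m push (Nat.succ fuel) V (c :: rest) acc = _
      rw [show gLoop maps n m push (Nat.succ fuel) V (c :: rest) acc
          = gLoop maps n m push fuel st.1 st.2 (acc + pvVal maps c.1 c.2) from rfl]
      rw [ih st.1 st.2 (acc + pvVal maps c.1 c.2) hInv' hcard', hRF]
      refine Prod.ext ?_ ?_
      · show acc + pvVal maps c.1 c.2 + ∑ x ∈ (pvRF maps n m V (c :: rest)).erase c, pvVal maps x.1 x.2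
            = acc + ∑ x ∈ pvRF maps n m V (c :: rest), pvVal maps x.1 x.2
        rw [add_assoc, Finset.add_sum_erase _ (fun x => pvVal maps x.1 x.2) hc]
      · show st.1 ∪ (pvRF maps n m V (c :: rest)).erase c = _
        rw [c1]
        ext x
        simp only [Finset.mem_union, Finset.mem_erase]
        constructor
        · rintro ((h | h) | ⟨_, h⟩)
          · exact Or.inl h
          · exact Or.inr (hFsub x h)
          · exact Or.inr h
        · rintro (h | h)
          · exact Or.inl (Or.inl h)
          · by_cases hxc : x = c
            · exact Or.inl (Or.inl (hxc ▸ hcV))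
            · exact Or.inr ⟨hxc, h⟩

-- canonical outer-loop body of A
noncomputable def pvCanon (maps : List String) (n m : Int)
    (st : Finset (Int × Int) × List Int) (i j : Int) : Finset (Int × Int) × List Int :=
  if (i, j) ∉ st.1 ∧ pvCharAt maps i j ≠ 'X' then
    (insert (i, j) st.1 ∪ pvRF maps n m (insert (i, j) st.1) [(i, j)],
     st.2 ++ [∑ c ∈ pvRF maps n m (insert (i, j) st.1) [(i, j)], pvVal maps c.1 c.2])
  else st

lemma search_spec (maps : List String) (n m : Int)
    (push : List (Int × Int) → (Int × Int) → List (Int × Int))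
    (hpush : ∀ (Q : List (Int × Int)) c, (push Q c).Perm (c :: Q))
    (V : Finset (Int × Int)) (i j : Int)
    (hg : pvGoodP maps n m (i, j)) :
    gLoop maps n m push (2 * (n.toNat * m.toNat) + 1) (insert (i, j) V) [(i, j)] 0
      = (∑ c ∈ pvRF maps n m (insert (i, j) V) [(i, j)], pvVal maps c.1 c.2,
         insert (i, j) V ∪ pvRF maps n m (insert (i, j) V) [(i, j)]) := by
  have hInv : pvInv maps n m (insert (i, j) V) [(i, j)] := by
    refine ⟨List.nodup_singleton _, ?_⟩
    intro q hq
    rw [List.mem_singleton] at hq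
    subst hq
    exact ⟨hg, Finset.mem_insert_self _ _⟩
  have hsub : pvRF maps n m (insert (i, j) V) [(i, j)] ⊆
      ([(i, j)].toFinset ∪ (Finset.Icc 0 (n - 1)) ×ˢ (Finset.Icc 0 (m - 1))) := by
    classical
    intro x hx
    exact Finset.mem_of_mem_filter x hx
  have hcard : (pvRF maps n m (insert (i, j) V) [(i, j)]).card ≤ 2 * (n.toNat * m.toNat) + 1 := by
    have h1 := Finset.card_le_card hsub
    have h2 := Finset.card_union_le ([((i : Int), (j : Int))].toFinset)
        ((Finset.Icc (0 : Int) (n - 1)) ×ˢ (Finset.Icc (0 : Int) (m - 1)))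
    have h3 : ((Finset.Icc (0 : Int) (n - 1)) ×ˢ (Finset.Icc (0 : Int) (m - 1))).card
        = n.toNat * m.toNat := by
      rw [Finset.card_product, Int.card_Icc, Int.card_Icc]
      have hn : (n - 1 + 1 - 0).toNat = n.toNat := by omega
      have hm : (m - 1 + 1 - 0).toNat = m.toNat := by omega
      rw [hn, hm]
    have h4 : ([((i : Int), (j : Int))].toFinset).card ≤ 1 := by simp
    omega
  rw [gLoop_spec maps n m push hpush _ _ _ 0 hInv hcard, zero_add]

lemma bodyA_eq (maps : List String) (n m i j : Int)
    (hi : i ∈ PySem.List.pyRange 0 n 1) (hj : j ∈ PySem.List.pyRange 0 m 1)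
    (st : Finset (Int × Int) × List Int) :
    (if (i, j) ∉ st.1 ∧ pvCharAt maps i j ≠ 'X' then
        let r := pvBfs maps n m st.1 i j
        (r.2, st.2 ++ [r.1])
      else st) = pvCanon maps n m st i j := by
  unfold pvCanon
  by_cases h : (i, j) ∉ st.1 ∧ pvCharAt maps i j ≠ 'X'
  · rw [if_pos h, if_pos h]
    obtain ⟨hi1, hi2⟩ := PySem.List.mem_pyRange_one.mp hi
    obtain ⟨hj1, hj2⟩ := PySem.List.mem_pyRange_one.mp hj
    have hg : pvGoodP maps n m (i, j) := ⟨hi1, hi2, hj1, hj2, h.2⟩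
    have hb : pvBfs maps n m st.1 i j
        = (∑ c ∈ pvRF maps n m (insert (i, j) st.1) [(i, j)], pvVal maps c.1 c.2,
           insert (i, j) st.1 ∪ pvRF maps n m (insert (i, j) st.1) [(i, j)]) := by
      unfold pvBfs
      rw [bfs_eq_gLoop]
      exact search_spec maps n m _ (fun Q c => List.perm_append_singleton c Q) st.1 i j hg
    rw [hb]
  · rw [if_neg h, if_neg h]

-- ============ shared connectivity facts ============

lemma pvAdj_symm (maps : List String) (n m : Int) : Symmetric (pvAdj maps n m) := by
  rintro ⟨c1, c2⟩ ⟨d1, d2⟩ ⟨hc, hd, hn⟩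
  refine ⟨hd, hc, ?_⟩
  simp only [pvNbrs, List.mem_cons, List.not_mem_nil, or_false, Prod.ext_iff] at hn ⊢
  rcases hn with h | h | h | h <;> obtain ⟨h1, h2⟩ := h <;> omega

lemma conn_good (maps : List String) (n m : Int) {c x : Int × Int}
    (h : pvConn maps n m c x) (hc : pvGoodP maps n m c) : pvGoodP maps n m x := by
  induction h with
  | refl => exact hc
  | tail _ hstep _ => exact hstep.2.1

-- V is a union of whole components
def pvClosed (maps : List String) (n m : Int) (V : Finset (Int × Int)) : Prop :=
  ∀ x ∈ V, ∀ d, pvAdj maps n m x d → d ∈ V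

lemma not_mem_of_conn (maps : List String) (n m : Int) {V : Finset (Int × Int)}
    (hV : pvClosed maps n m V) {c x : Int × Int} (h : pvConn maps n m c x) (hc : c ∉ V) :
    x ∉ V := by
  induction h with
  | refl => exact hc
  | tail _ hstep ih =>
    intro hd
    exact ih (hV _ hd _ (pvAdj_symm maps n m hstep))

lemma mem_pvCells (n m : Int) (c : Int × Int) :
    c ∈ pvCells n m ↔ 0 ≤ c.1 ∧ c.1 < n ∧ 0 ≤ c.2 ∧ c.2 < m := by
  obtain ⟨i, j⟩ := c
  simp only [pvCells, List.mem_flatMap, List.mem_map, PySem.List.mem_pyRange_one,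
    Prod.mk.injEq]
  constructor
  · rintro ⟨a, ⟨ha1, ha2⟩, b, ⟨hb1, hb2⟩, he1, he2⟩
    subst he1; subst he2; exact ⟨ha1, ha2, hb1, hb2⟩
  · rintro ⟨h1, h2, h3, h4⟩
    exact ⟨i, ⟨h1, h2⟩, j, ⟨h3, h4⟩, rfl, rfl⟩

lemma nodup_pvCells (n m : Int) : (pvCells n m).Nodup := by
  rw [pvCells, List.nodup_flatMap]
  refine ⟨fun i _ => ?_, ?_⟩
  · exact (PySem.List.nodup_pyRange_one 0 m).map (fun a b h => by
      simpa using congrArg Prod.snd h)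
  · refine List.Pairwise.imp ?_ ((PySem.List.nodup_pyRange_one 0 n))
    intro a b hab x hx hy
    simp only [List.mem_map] at hx hy
    obtain ⟨j1, _, he1⟩ := hx
    obtain ⟨j2, _, he2⟩ := hy
    have e1 := congrArg Prod.fst he1
    have e2 := congrArg Prod.fst he2
    simp only at e1 e2
    exact hab (e1.symm ▸ e2.symm ▸ rfl)

lemma mem_pvGCells (maps : List String) (n m : Int) (c : Int × Int) :
    c ∈ pvGCells maps n m ↔ pvGoodP maps n m c := by
  simp only [pvGCells, List.mem_filter, decide_eq_true_eq, mem_pvCells]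
  constructor
  · exact fun h => h.2
  · intro h
    exact ⟨⟨h.1, h.2.1, h.2.2.1, h.2.2.2.1⟩, h⟩

lemma nodup_pvGCells (maps : List String) (n m : Int) : (pvGCells maps n m).Nodup :=
  (nodup_pvCells n m).filter _

lemma mem_pvCompF (maps : List String) (n m : Int) {c : Int × Int}
    (hc : pvGoodP maps n m c) (x : Int × Int) :
    x ∈ pvCompF maps n m c ↔ pvConn maps n m c x := by
  classical
  unfold pvCompF
  rw [Finset.mem_filter, List.mem_toFinset, mem_pvGCells]
  constructor
  · exact fun h => h.2
  · exact fun h => ⟨conn_good maps n m h hc, h⟩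

lemma pvRF_eq_compF (maps : List String) (n m : Int) {V : Finset (Int × Int)}
    (hV : pvClosed maps n m V) {c : Int × Int} (hc : pvGoodP maps n m c) (hcV : c ∉ V) :
    pvRF maps n m (insert c V) [c] = pvCompF maps n m c := by
  ext x
  rw [mem_pvRF, mem_pvCompF maps n m hc]
  have hseed : ∀ y, y ∈ pvRS maps n m (insert c V) [c] ↔
      Relation.ReflTransGen (pvRel maps n m (insert c V)) c y := by
    intro y
    simp only [pvRS, Set.mem_setOf_eq, List.mem_singleton]
    constructor
    · rintro ⟨q, rfl, h⟩; exact h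
    · exact fun h => ⟨c, rfl, h⟩
  rw [hseed x]
  constructor
  · intro h
    have : pvConn maps n m c x ∧ pvGoodP maps n m x := by
      induction h with
      | refl => exact ⟨Relation.ReflTransGen.refl, hc⟩
      | tail _ hstep ih =>
        exact ⟨ih.1.tail ⟨ih.2, hstep.1, hstep.2.2⟩, hstep.1⟩
    exact this.1
  · intro h
    induction h with
    | refl => exact Relation.ReflTransGen.refl
    | tail hconn hstep ih =>
      rename_i b d
      by_cases hdc : d = c
      · subst hdc; exact Relation.ReflTransGen.refl
      · refine ih.tail ⟨hstep.2.1, ?_, hstep.2.2⟩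
        rw [Finset.mem_insert]
        rintro (h | h)
        · exact hdc h
        · exact not_mem_of_conn maps n m hV (hconn.tail hstep) hcV h

lemma closed_union_compF (maps : List String) (n m : Int) {V : Finset (Int × Int)}
    (hV : pvClosed maps n m V) {c : Int × Int} (hc : pvGoodP maps n m c) :
    pvClosed maps n m (V ∪ pvCompF maps n m c) := by
  intro x hx d hadj
  rw [Finset.mem_union] at hx ⊢
  rcases hx with h | h
  · exact Or.inl (hV x h d hadj)
  · refine Or.inr ?_
    rw [mem_pvCompF maps n m hc] at h ⊢
    exact h.tail hadj

-- fold congruence under an invariant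
lemma foldl_inv_congr {α β : Type} (P : α → Prop) (f g : α → β → α) (l : List β) (s : α)
    (hP : P s) (h : ∀ s x, P s → x ∈ l → f s x = g s x ∧ P (f s x)) :
    l.foldl f s = l.foldl g s := by
  induction l generalizing s with
  | nil => rfl
  | cons x xs ih =>
    have hx := h s x hP (List.mem_cons_self)
    simp only [List.foldl_cons]
    rw [← hx.1]
    exact ih (f s x) hx.2 (fun s y hs hy => h s y hs (List.mem_cons_of_mem _ hy))

-- ============ B-side: union-find ============

def pvMono (p : List Int) : Prop :=
  ∀ k : Nat, k < p.length → 0 ≤ p.getD k 0 ∧ p.getD k 0 ≤ (k : Int)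

abbrev pvInR (p : List Int) (k : Int) : Prop := 0 ≤ k ∧ k < (p.length : Int)

def pvRoot (p : List Int) (k : Int) : Prop := pvPar p k = k

lemma ufFind_root (p : List Int) (hM : pvMono p) :
    ∀ (fuel : Nat) (k : Int), pvInR p k → k < (fuel : Int) →
      pvRoot p (ufFind p fuel k) ∧ pvInR p (ufFind p fuel k) := by
  intro fuel
  induction fuel with
  | zero =>
    intro k hk hb
    exact absurd hb (by exact_mod_cast not_lt.mpr hk.1)
  | succ fuel ih =>
    intro k hk hb
    rw [ufFind]
    by_cases hr : pvPar p k = k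
    · rw [if_pos hr]; exact ⟨hr, hk⟩
    · rw [if_neg hr]
      have hlen : k.toNat < p.length := by omega
      have hM' := hM k.toNat hlen
      have hcast : ((k.toNat : Nat) : Int) = k := by omega
      have hpar : 0 ≤ pvPar p k ∧ pvPar p k ≤ k := by
        unfold pvPar; rw [← hcast]; exact hM'
      have hlt : pvPar p k < k := lt_of_le_of_ne hpar.2 (by simpa [pvPar] using hr)
      exact ih (pvPar p k) ⟨hpar.1, by omega⟩ (by push_cast at hb ⊢; omega)

lemma ufFind_lt_succ (p : List Int) (fuel : Nat) (k : Int) (hr : ¬ pvPar p k = k) :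
    ufFind p (fuel + 1) k = ufFind p fuel (pvPar p k) := by
  rw [ufFind, if_neg hr]

lemma ufFind_congr (p : List Int) (hM : pvMono p) :
    ∀ (f1 f2 : Nat) (k : Int), pvInR p k → k < (f1 : Int) → k < (f2 : Int) →
      ufFind p f1 k = ufFind p f2 k := by
  intro f1
  induction f1 with
  | zero =>
    intro f2 k hk h1 _
    exact absurd h1 (by exact_mod_cast not_lt.mpr hk.1)
  | succ f1 ih =>
    intro f2 k hk h1 h2
    match f2 with
    | 0 => exact absurd h2 (by exact_mod_cast not_lt.mpr hk.1)
    | f2 + 1 =>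
      by_cases hr : pvPar p k = k
      · rw [ufFind, if_pos hr, ufFind, if_pos hr]
      · rw [ufFind_lt_succ p f1 k hr, ufFind_lt_succ p f2 k hr]
        have hlen : k.toNat < p.length := by omega
        have hM' := hM k.toNat hlen
        have hcast : ((k.toNat : Nat) : Int) = k := by omega
        have hpar : 0 ≤ pvPar p k ∧ pvPar p k ≤ k := by
          unfold pvPar; rw [← hcast]; exact hM'
        have hlt : pvPar p k < k := lt_of_le_of_ne hpar.2 (by simpa [pvPar] using hr)
        exact ih f2 (pvPar p k) ⟨hpar.1, by omega⟩ (by push_cast at h1 ⊢; omega)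
          (by push_cast at h2 ⊢; omega)

-- F p k: the call the port makes
def pvF (p : List Int) (k : Int) : Int := ufFind p p.length k

def pvPtr (p : List Int) (a b : Int) : Prop := pvInR p a ∧ b = pvPar p a

lemma rtg_ptr_find (p : List Int) (hM : pvMono p) :
    ∀ (fuel : Nat) (k : Int), pvInR p k →
      Relation.ReflTransGen (pvPtr p) k (ufFind p fuel k) ∧ pvInR p (ufFind p fuel k) := by
  intro fuel
  induction fuel with
  | zero => exact fun k hk => ⟨Relation.ReflTransGen.refl, hk⟩
  | succ fuel ih =>
    intro k hk
    by_cases hr : pvPar p k = k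
    · rw [ufFind, if_pos hr]; exact ⟨Relation.ReflTransGen.refl, hk⟩
    · rw [ufFind_lt_succ p fuel k hr]
      have hlen : k.toNat < p.length := by
        have := hk.1; have := hk.2; omega
      have hM' := hM k.toNat hlen
      have hcast : ((k.toNat : Nat) : Int) = k := by have := hk.1; omega
      have hpar : 0 ≤ pvPar p k ∧ pvPar p k ≤ k := by
        unfold pvPar; rw [← hcast]; exact hM'
      obtain ⟨hrtg, hin⟩ := ih (pvPar p k) ⟨hpar.1, by have := hk.2; omega⟩
      exact ⟨Relation.ReflTransGen.head ⟨hk, rfl⟩ hrtg, hin⟩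

lemma find_parent_eq (p : List Int) (hM : pvMono p) {k : Int} (hk : pvInR p k) :
    pvF p (pvPar p k) = pvF p k := by
  by_cases hr : pvPar p k = k
  · rw [hr]
  · have hlen : k.toNat < p.length := by have := hk.1; have := hk.2; omega
    have hM' := hM k.toNat hlen
    have hcast : ((k.toNat : Nat) : Int) = k := by have := hk.1; omega
    have hpar : 0 ≤ pvPar p k ∧ pvPar p k ≤ k := by
      unfold pvPar; rw [← hcast]; exact hM'
    obtain ⟨f, hf⟩ : ∃ f, p.length = f + 1 := ⟨p.length - 1, by omega⟩
    have h2 : pvF p k = ufFind p f (pvPar p k) := by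
      rw [pvF, hf, ufFind_lt_succ p f k hr]
    rw [h2, pvF]
    exact ufFind_congr p hM p.length f (pvPar p k) ⟨hpar.1, by have := hk.2; omega⟩
      (by have := hk.2; omega) (by have := hk.2; omega)

lemma rtg_imp_eqv {α : Type} (r : α → α → Prop) {a b : α}
    (h : Relation.ReflTransGen r a b) : Relation.EqvGen r a b := by
  induction h with
  | refl => exact Relation.EqvGen.refl _
  | tail _ hstep ih => exact Relation.EqvGen.trans _ _ _ ih (Relation.EqvGen.rel _ _ hstep)

lemma eqvGen_sub {α : Type} {r s : α → α → Prop}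
    (h : ∀ a b, r a b → Relation.EqvGen s a b) :
    ∀ a b, Relation.EqvGen r a b → Relation.EqvGen s a b := by
  intro a b hab
  induction hab with
  | rel x y hxy => exact h x y hxy
  | refl x => exact Relation.EqvGen.refl x
  | symm x y _ ih => exact Relation.EqvGen.symm x y ih
  | trans x y z _ _ ih1 ih2 => exact Relation.EqvGen.trans x y z ih1 ih2

lemma eqv_ptr_findEq (p : List Int) (hM : pvMono p) :
    ∀ a b, Relation.EqvGen (pvPtr p) a b → pvF p a = pvF p b := by
  intro a b hab
  induction hab with
  | rel x y hxy => rw [hxy.2]; exact (find_parent_eq p hM hxy.1).symm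
  | refl x => rfl
  | symm x y _ ih => exact ih.symm
  | trans x y z _ _ ih1 ih2 => exact ih1.trans ih2

lemma findEq_iff_eqv (p : List Int) (hM : pvMono p) {a b : Int}
    (ha : pvInR p a) (hb : pvInR p b) :
    pvF p a = pvF p b ↔ Relation.EqvGen (pvPtr p) a b := by
  constructor
  · intro h
    have h1 := (rtg_ptr_find p hM p.length a ha).1
    have h2 := (rtg_ptr_find p hM p.length b hb).1
    refine Relation.EqvGen.trans _ _ _ (rtg_imp_eqv _ h1) ?_
    rw [show ufFind p p.length a = ufFind p p.length b from h]
    exact Relation.EqvGen.symm _ _ (rtg_imp_eqv _ h2)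
  · exact eqv_ptr_findEq p hM a b

lemma par_set_self (p : List Int) {r : Int} (hr : pvInR p r) (v : Int) :
    pvPar (p.set r.toNat v) r = v := by
  unfold pvPar
  have : r.toNat < p.length := by have := hr.1; have := hr.2; omega
  simp [List.getD, this]

lemma par_set_other (p : List Int) {r k : Int} (hr : 0 ≤ r) (hk : 0 ≤ k) (hne : k ≠ r) (v : Int) :
    pvPar (p.set r.toNat v) k = pvPar p k := by
  unfold pvPar
  have : r.toNat ≠ k.toNat := by omega
  simp [List.getD, List.getElem?_set_ne this]

-- attaching root r2 below root r1 < r2, seen through EqvGen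
lemma set_root_eqv (p : List Int) (hM : pvMono p) {r1 r2 : Int}
    (h2 : pvRoot p r2) (hr1 : pvInR p r1) (hr2 : pvInR p r2) (hlt : r1 < r2) :
    (p.set r2.toNat r1).length = p.length ∧ pvMono (p.set r2.toNat r1) ∧
    (∀ x y, Relation.EqvGen (pvPtr (p.set r2.toNat r1)) x y ↔
        Relation.EqvGen (fun u v => pvPtr p u v ∨ (u = r2 ∧ v = r1)) x y) := by
  have hlen : (p.set r2.toNat r1).length = p.length := List.length_set ..
  refine ⟨hlen, ?_, ?_⟩
  · intro k hk
    rw [hlen] at hk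
    by_cases hkr : k = r2.toNat
    · subst hkr
      have : pvPar (p.set r2.toNat r1) r2 = r1 := par_set_self p hr2 r1
      unfold pvPar at this
      have hc : ((r2.toNat : Nat) : Int) = r2 := by have := hr2.1; omega
      rw [← hc] at this ⊢
      rw [this]
      exact ⟨hr1.1, by omega⟩
    · have : (p.set r2.toNat r1).getD k 0 = p.getD k 0 := by
        simp [List.getD, List.getElem?_set_ne (by omega : r2.toNat ≠ k)]
      rw [this]
      exact hM k hk
  · intro x y
    constructor
    · refine eqvGen_sub (fun u v huv => ?_) x y
      obtain ⟨hu0, hv⟩ := huv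
      have hu : pvInR p u := ⟨hu0.1, by rw [← hlen]; exact hu0.2⟩
      by_cases hur : u = r2
      · subst hur
        rw [par_set_self p hr2 r1] at hv
        exact Relation.EqvGen.rel _ _ (Or.inr ⟨rfl, hv⟩)
      · rw [par_set_other p hr2.1 hu.1 hur r1] at hv
        exact Relation.EqvGen.rel _ _ (Or.inl ⟨hu, hv⟩)
    · refine eqvGen_sub (fun u v huv => ?_) x y
      rcases huv with ⟨hu, hv⟩ | ⟨hu, hv⟩
      · by_cases hur : u = r2
        · subst hur
          rw [pvRoot] at h2
          rw [h2] at hv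
          subst hv
          exact Relation.EqvGen.refl _
        · refine Relation.EqvGen.rel _ _ ⟨⟨hu.1, by rw [hlen]; exact hu.2⟩, ?_⟩
          rw [par_set_other p hr2.1 hu.1 hur r1]
          exact hv
      · rw [hu, hv]
        exact Relation.EqvGen.rel _ _ ⟨⟨hr2.1, by rw [hlen]; exact hr2.2⟩,
          (par_set_self p hr2 r1).symm⟩

-- one union step, seen through EqvGen
lemma ufUnion_eqv (p : List Int) (hM : pvMono p) {a b : Int}
    (ha : pvInR p a) (hb : pvInR p b) :
    (ufUnion p a b).length = p.length ∧ pvMono (ufUnion p a b) ∧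
    (∀ x y, Relation.EqvGen (pvPtr (ufUnion p a b)) x y ↔
        Relation.EqvGen (fun u v => pvPtr p u v ∨ (u = a ∧ v = b)) x y) := by
  have hla : a < ((p.length : Nat) : Int) := ha.2
  have hra := ufFind_root p hM p.length a ha hla
  have hrb := ufFind_root p hM p.length b hb hb.2
  have hea : Relation.EqvGen (pvPtr p) a (ufFind p p.length a) :=
    rtg_imp_eqv _ (rtg_ptr_find p hM p.length a ha).1
  have heb : Relation.EqvGen (pvPtr p) b (ufFind p p.length b) :=
    rtg_imp_eqv _ (rtg_ptr_find p hM p.length b hb).1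
  set ra := ufFind p p.length a with hra_def
  set rb := ufFind p p.length b with hrb_def
  have hemb : ∀ x y, Relation.EqvGen (pvPtr p) x y →
      Relation.EqvGen (fun u v => pvPtr p u v ∨ (u = a ∧ v = b)) x y :=
    fun x y h => eqvGen_sub (fun u v huv => Relation.EqvGen.rel _ _ (Or.inl huv)) x y h
  have hpair : Relation.EqvGen (fun u v => pvPtr p u v ∨ (u = a ∧ v = b)) a b :=
    Relation.EqvGen.rel _ _ (Or.inr ⟨rfl, rfl⟩)
  unfold ufUnion
  rw [← hra_def, ← hrb_def]
  by_cases hab : ra < rb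
  · rw [if_pos hab]
    obtain ⟨hl, hm, hiff⟩ := set_root_eqv p hM hrb.1 hra.2 hrb.2 hab
    refine ⟨hl, hm, fun x y => (hiff x y).trans ⟨?_, ?_⟩⟩
    · refine eqvGen_sub (fun u v huv => ?_) x y
      rcases huv with huv | ⟨hu, hv⟩
      · exact Relation.EqvGen.rel _ _ (Or.inl huv)
      · subst hu; subst hv
        refine Relation.EqvGen.trans _ _ _ (Relation.EqvGen.symm _ _ (hemb _ _ heb)) ?_
        exact Relation.EqvGen.trans _ _ _ (Relation.EqvGen.symm _ _ hpair) (hemb _ _ hea)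
    · refine eqvGen_sub (fun u v huv => ?_) x y
      rcases huv with huv | ⟨hu, hv⟩
      · exact Relation.EqvGen.rel _ _ (Or.inl huv)
      · subst hu; subst hv
        have hprb : Relation.EqvGen (fun u v => pvPtr p u v ∨ (u = rb ∧ v = ra)) rb ra :=
          Relation.EqvGen.rel _ _ (Or.inr ⟨rfl, rfl⟩)
        have hemb' : ∀ x y, Relation.EqvGen (pvPtr p) x y →
            Relation.EqvGen (fun u v => pvPtr p u v ∨ (u = rb ∧ v = ra)) x y :=
          fun x y h => eqvGen_sub (fun u v huv => Relation.EqvGen.rel _ _ (Or.inl huv)) x y h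
        refine Relation.EqvGen.trans _ _ _ (hemb' _ _ hea) ?_
        exact Relation.EqvGen.trans _ _ _ (Relation.EqvGen.symm _ _ hprb)
          (Relation.EqvGen.symm _ _ (hemb' _ _ heb))
  · rw [if_neg hab]
    by_cases hba : rb < ra
    · rw [if_pos hba]
      obtain ⟨hl, hm, hiff⟩ := set_root_eqv p hM hra.1 hrb.2 hra.2 hba
      refine ⟨hl, hm, fun x y => (hiff x y).trans ⟨?_, ?_⟩⟩
      · refine eqvGen_sub (fun u v huv => ?_) x y
        rcases huv with huv | ⟨hu, hv⟩
        · exact Relation.EqvGen.rel _ _ (Or.inl huv)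
        · subst hu; subst hv
          refine Relation.EqvGen.trans _ _ _ (Relation.EqvGen.symm _ _ (hemb _ _ hea)) ?_
          exact Relation.EqvGen.trans _ _ _ hpair (hemb _ _ heb)
      · refine eqvGen_sub (fun u v huv => ?_) x y
        rcases huv with huv | ⟨hu, hv⟩
        · exact Relation.EqvGen.rel _ _ (Or.inl huv)
        · subst hu; subst hv
          have hprb : Relation.EqvGen (fun u v => pvPtr p u v ∨ (u = ra ∧ v = rb)) ra rb :=
            Relation.EqvGen.rel _ _ (Or.inr ⟨rfl, rfl⟩)
          have hemb' : ∀ x y, Relation.EqvGen (pvPtr p) x y →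
              Relation.EqvGen (fun u v => pvPtr p u v ∨ (u = ra ∧ v = rb)) x y :=
            fun x y h => eqvGen_sub (fun u v huv => Relation.EqvGen.rel _ _ (Or.inl huv)) x y h
          refine Relation.EqvGen.trans _ _ _ (hemb' _ _ hea) ?_
          exact Relation.EqvGen.trans _ _ _ hprb (Relation.EqvGen.symm _ _ (hemb' _ _ heb))
    · rw [if_neg hba]
      have heq : ra = rb := by omega
      refine ⟨rfl, hM, fun x y => ⟨?_, ?_⟩⟩
      · exact fun h => hemb x y h
      · refine eqvGen_sub (fun u v huv => ?_) x y
        rcases huv with huv | ⟨hu, hv⟩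
        · exact Relation.EqvGen.rel _ _ huv
        · subst hu; subst hv
          refine Relation.EqvGen.trans _ _ _ hea ?_
          rw [heq]
          exact Relation.EqvGen.symm _ _ heb

-- the whole edge-processing fold
lemma ufFold_eqv (edges : List (Int × Int)) :
    ∀ (p : List Int), pvMono p → (∀ e ∈ edges, pvInR p e.1 ∧ pvInR p e.2) →
      (edges.foldl (fun p e => ufUnion p e.1 e.2) p).length = p.length ∧
      pvMono (edges.foldl (fun p e => ufUnion p e.1 e.2) p) ∧
      (∀ x y, Relation.EqvGen (pvPtr (edges.foldl (fun p e => ufUnion p e.1 e.2) p)) x y ↔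
          Relation.EqvGen (fun u v => pvPtr p u v ∨ (u, v) ∈ edges) x y) := by
  induction edges with
  | nil =>
    intro p hM _
    refine ⟨rfl, hM, fun x y => ⟨?_, ?_⟩⟩
    · exact fun h => eqvGen_sub (fun u v huv => Relation.EqvGen.rel _ _ (Or.inl huv)) x y h
    · refine fun h => eqvGen_sub (fun u v huv => ?_) x y h
      rcases huv with huv | huv
      · exact Relation.EqvGen.rel _ _ huv
      · exact absurd huv (List.not_mem_nil)
  | cons e es ih =>
    intro p hM he
    obtain ⟨hl1, hm1, hiff1⟩ := ufUnion_eqv p hM (he e List.mem_cons_self).1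
      (he e List.mem_cons_self).2
    have he' : ∀ e' ∈ es, pvInR (ufUnion p e.1 e.2) e'.1 ∧ pvInR (ufUnion p e.1 e.2) e'.2 := by
      intro e' he''
      obtain ⟨h1, h2⟩ := he e' (List.mem_cons_of_mem _ he'')
      exact ⟨⟨h1.1, by rw [hl1]; exact h1.2⟩, ⟨h2.1, by rw [hl1]; exact h2.2⟩⟩
    obtain ⟨hl2, hm2, hiff2⟩ := ih (ufUnion p e.1 e.2) hm1 he'
    rw [List.foldl_cons]
    refine ⟨hl2.trans hl1, hm2, fun x y => (hiff2 x y).trans ⟨?_, ?_⟩⟩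
    · refine fun h => eqvGen_sub (fun u v huv => ?_) x y h
      rcases huv with huv | huv
      · refine eqvGen_sub (fun w z hwz => ?_) u v ((hiff1 u v).mp (Relation.EqvGen.rel _ _ huv))
        rcases hwz with hwz | ⟨hw, hz⟩
        · exact Relation.EqvGen.rel _ _ (Or.inl hwz)
        · exact Relation.EqvGen.rel _ _ (Or.inr (by rw [hw, hz]; exact List.mem_cons_self))
      · exact Relation.EqvGen.rel _ _ (Or.inr (List.mem_cons_of_mem _ huv))
    · refine fun h => eqvGen_sub (fun u v huv => ?_) x y h
      have hembed : ∀ u v, Relation.EqvGen (pvPtr (ufUnion p e.1 e.2)) u v →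
          Relation.EqvGen (fun u v => pvPtr (ufUnion p e.1 e.2) u v ∨ (u, v) ∈ es) u v :=
        fun u v h => eqvGen_sub (fun w z hwz => Relation.EqvGen.rel _ _ (Or.inl hwz)) u v h
      rcases huv with huv | huv
      · exact hembed u v ((hiff1 u v).mpr (Relation.EqvGen.rel _ _ (Or.inl huv)))
      · rcases List.mem_cons.mp huv with huv | huv
        · refine hembed u v ((hiff1 u v).mpr (Relation.EqvGen.rel _ _ (Or.inr ?_)))
          exact ⟨congrArg Prod.fst huv, congrArg Prod.snd huv⟩
        · exact Relation.EqvGen.rel _ _ (Or.inr huv)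

-- ============ the edge list the B port processes ============

def pvRD (maps : List String) (n m : Int) (c d : Int × Int) : Prop :=
  pvGoodP maps n m c ∧ pvGoodP maps n m d ∧ (d = (c.1, c.2 + 1) ∨ d = (c.1 + 1, c.2))

def pvEdgesOf (maps : List String) (n m : Int) (c : Int × Int) : List (Int × Int) :=
  (if pvGoodP maps n m c ∧ pvGoodP maps n m (c.1, c.2 + 1)
    then [(pvEnc m c, pvEnc m (c.1, c.2 + 1))] else []) ++
  (if pvGoodP maps n m c ∧ pvGoodP maps n m (c.1 + 1, c.2)
    then [(pvEnc m c, pvEnc m (c.1 + 1, c.2))] else [])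

def pvE (maps : List String) (n m : Int) : List (Int × Int) :=
  (pvCells n m).flatMap (pvEdgesOf maps n m)

def pvP (maps : List String) (n m : Int) : List Int :=
  (pvE maps n m).foldl (fun p e => ufUnion p e.1 e.2) (PySem.List.pyRange 0 (n * m) 1)

def pvKey (maps : List String) (n m : Int) (c : Int × Int) : Int :=
  ufFind (pvP maps n m) (pvP maps n m).length (pvEnc m c)

lemma mem_pvE (maps : List String) (n m : Int) (x y : Int) :
    (x, y) ∈ pvE maps n m ↔
      ∃ c d, pvRD maps n m c d ∧ x = pvEnc m c ∧ y = pvEnc m d := by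
  simp only [pvE, List.mem_flatMap]
  constructor
  · rintro ⟨c, _, hmem⟩
    rw [pvEdgesOf, List.mem_append] at hmem
    rcases hmem with h | h
    · split_ifs at h with hcond
      · rw [List.mem_singleton] at h
        exact ⟨c, (c.1, c.2 + 1), ⟨hcond.1, hcond.2, Or.inl rfl⟩,
          congrArg Prod.fst h, congrArg Prod.snd h⟩
      · exact absurd h List.not_mem_nil
    · split_ifs at h with hcond
      · rw [List.mem_singleton] at h
        exact ⟨c, (c.1 + 1, c.2), ⟨hcond.1, hcond.2, Or.inr rfl⟩,
          congrArg Prod.fst h, congrArg Prod.snd h⟩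
      · exact absurd h List.not_mem_nil
  · rintro ⟨c, d, ⟨hgc, hgd, hd⟩, rfl, rfl⟩
    refine ⟨c, (mem_pvCells n m c).mpr ⟨hgc.1, hgc.2.1, hgc.2.2.1, hgc.2.2.2.1⟩, ?_⟩
    rw [pvEdgesOf, List.mem_append]
    rcases hd with rfl | rfl
    · exact Or.inl (by rw [if_pos ⟨hgc, hgd⟩]; exact List.mem_singleton.mpr rfl)
    · exact Or.inr (by rw [if_pos ⟨hgc, hgd⟩]; exact List.mem_singleton.mpr rfl)

lemma enc_inj (m : Int) {c d : Int × Int} (hc2 : 0 ≤ c.2 ∧ c.2 < m) (hd2 : 0 ≤ d.2 ∧ d.2 < m)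
    (h : pvEnc m c = pvEnc m d) : c = d := by
  obtain ⟨c1, c2⟩ := c
  obtain ⟨d1, d2⟩ := d
  simp only at hc2 hd2
  simp only [pvEnc] at h
  have h1 : c1 = d1 := by
    rcases lt_trichotomy c1 d1 with hlt | heq | hgt
    · exfalso
      have : (c1 + 1) * m ≤ d1 * m :=
        mul_le_mul_of_nonneg_right (by omega) (by omega)
      nlinarith
    · exact heq
    · exfalso
      have : (d1 + 1) * m ≤ c1 * m :=
        mul_le_mul_of_nonneg_right (by omega) (by omega)
      nlinarith
  subst h1
  have h2 : c2 = d2 := by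
    have := add_left_cancel h
    exact this
  rw [h2]

lemma enc_inR (maps : List String) (n m : Int) {c : Int × Int} (hc : pvGoodP maps n m c) :
    0 ≤ pvEnc m c ∧ pvEnc m c < n * m := by
  obtain ⟨h1, h2, h3, h4, _⟩ := hc
  constructor
  · exact add_nonneg (mul_nonneg h1 (by omega)) h3
  · have : (c.1 + 1) * m ≤ n * m := mul_le_mul_of_nonneg_right (by omega) (by omega)
    simp only [pvEnc]
    nlinarith

lemma conn_iff_eqvRD (maps : List String) (n m : Int) (x y : Int × Int) :
    pvConn maps n m x y ↔ Relation.EqvGen (pvRD maps n m) x y := by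
  constructor
  · intro h
    induction h with
    | refl => exact Relation.EqvGen.refl _
    | tail _ hstep ih =>
      rename_i b d _
      refine Relation.EqvGen.trans _ _ _ ih ?_
      obtain ⟨hgb, hgd, hn⟩ := hstep
      obtain ⟨b1, b2⟩ := b
      obtain ⟨d1, d2⟩ := d
      simp only [pvNbrs, List.mem_cons, List.not_mem_nil, or_false, Prod.mk.injEq] at hn
      rcases hn with ⟨h1, h2⟩ | ⟨h1, h2⟩ | ⟨h1, h2⟩ | ⟨h1, h2⟩
      · exact Relation.EqvGen.symm _ _ (Relation.EqvGen.rel _ _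
          ⟨hgd, hgb, Or.inr (Prod.ext_iff.mpr ⟨by simp; omega, by simp; omega⟩)⟩)
      · exact Relation.EqvGen.rel _ _
          ⟨hgb, hgd, Or.inr (Prod.ext_iff.mpr ⟨by simp; omega, by simp; omega⟩)⟩
      · exact Relation.EqvGen.symm _ _ (Relation.EqvGen.rel _ _
          ⟨hgd, hgb, Or.inl (Prod.ext_iff.mpr ⟨by simp; omega, by simp; omega⟩)⟩)
      · exact Relation.EqvGen.rel _ _
          ⟨hgb, hgd, Or.inl (Prod.ext_iff.mpr ⟨by simp; omega, by simp; omega⟩)⟩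
  · intro h
    induction h with
    | rel a b hab =>
      obtain ⟨hga, hgb, hd⟩ := hab
      refine Relation.ReflTransGen.single ⟨hga, hgb, ?_⟩
      rcases hd with rfl | rfl
      · simp [pvNbrs]
      · simp [pvNbrs]
    | refl => exact Relation.ReflTransGen.refl
    | symm a b _ ih =>
      exact Relation.ReflTransGen.symmetric (pvAdj_symm maps n m) ih
    | trans a b c _ _ ih1 ih2 => exact ih1.trans ih2

lemma eqvRD_imp_eqvE (maps : List String) (n m : Int) {c d : Int × Int}
    (h : Relation.EqvGen (pvRD maps n m) c d) :
    Relation.EqvGen (fun u v => (u, v) ∈ pvE maps n m) (pvEnc m c) (pvEnc m d) := by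
  induction h with
  | rel a b hab =>
    exact Relation.EqvGen.rel _ _ ((mem_pvE maps n m _ _).mpr ⟨a, b, hab, rfl, rfl⟩)
  | refl a => exact Relation.EqvGen.refl _
  | symm a b _ ih => exact Relation.EqvGen.symm _ _ ih
  | trans a b c _ _ ih1 ih2 => exact Relation.EqvGen.trans _ _ _ ih1 ih2

lemma good_c2 (maps : List String) (n m : Int) {c : Int × Int} (h : pvGoodP maps n m c) :
    0 ≤ c.2 ∧ c.2 < m := ⟨h.2.2.1, h.2.2.2.1⟩

lemma eqvE_char (maps : List String) (n m : Int) :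
    ∀ x y, Relation.EqvGen (fun u v => (u, v) ∈ pvE maps n m) x y →
      x = y ∨ ∃ c d, pvGoodP maps n m c ∧ pvGoodP maps n m d ∧ x = pvEnc m c ∧ y = pvEnc m d ∧
        Relation.EqvGen (pvRD maps n m) c d := by
  intro x y h
  induction h with
  | rel a b hab =>
    obtain ⟨c, d, hrd, rfl, rfl⟩ := (mem_pvE maps n m a b).mp hab
    exact Or.inr ⟨c, d, hrd.1, hrd.2.1, rfl, rfl, Relation.EqvGen.rel _ _ hrd⟩
  | refl a => exact Or.inl rfl
  | symm a b _ ih =>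
    rcases ih with h | ⟨c, d, h1, h2, h3, h4, h5⟩
    · exact Or.inl h.symm
    · exact Or.inr ⟨d, c, h2, h1, h4, h3, Relation.EqvGen.symm _ _ h5⟩
  | trans a b c _ _ ih1 ih2 =>
    rcases ih1 with h | ⟨c1, d1, h1, h2, h3, h4, h5⟩
    · rcases ih2 with h' | h' 
      · exact Or.inl (h.trans h')
      · rw [h]; exact Or.inr h'
    · rcases ih2 with h' | ⟨c2, d2, h1', h2', h3', h4', h5'⟩
      · exact Or.inr ⟨c1, d1, h1, h2, h3, h' ▸ h4, h5⟩
      · refine Or.inr ⟨c1, d2, h1, h2', h3, h4', ?_⟩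
        have hdc : d1 = c2 :=
          enc_inj m (good_c2 maps n m h2) (good_c2 maps n m h1') (by rw [← h4, h3'])
        exact Relation.EqvGen.trans _ _ _ h5 (hdc ▸ h5')

-- EqvGen over the processed edges is exactly grid connectivity
lemma eqvE_iff_conn (maps : List String) (n m : Int) {c d : Int × Int}
    (hc : pvGoodP maps n m c) (hd : pvGoodP maps n m d) :
    Relation.EqvGen (fun u v => (u, v) ∈ pvE maps n m) (pvEnc m c) (pvEnc m d) ↔
      pvConn maps n m c d := by
  constructor
  · intro h
    rcases eqvE_char maps n m _ _ h with h | ⟨c', d', h1, h2, h3, h4, h5⟩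
    · have : c = d := enc_inj m (good_c2 maps n m hc) (good_c2 maps n m hd) h
      rw [this]
      exact Relation.ReflTransGen.refl
    · have hcc : c = c' := enc_inj m (good_c2 maps n m hc) (good_c2 maps n m h1) h3
      have hdd : d = d' := enc_inj m (good_c2 maps n m hd) (good_c2 maps n m h2) h4
      rw [conn_iff_eqvRD, hcc, hdd]
      exact h5
  · intro h
    exact eqvRD_imp_eqvE maps n m ((conn_iff_eqvRD maps n m c d).mp h)

-- properties of the processed parent array
lemma pvP_spec (maps : List String) (n m : Int) (hm : 0 ≤ m) (hn : 0 ≤ n) :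
    (pvP maps n m).length = (n * m).toNat ∧ pvMono (pvP maps n m) ∧
    (∀ x y, pvInR (pvP maps n m) x → pvInR (pvP maps n m) y →
      (pvF (pvP maps n m) x = pvF (pvP maps n m) y ↔
        Relation.EqvGen (fun u v => (u, v) ∈ pvE maps n m) x y)) := by
  have hnm : 0 ≤ n * m := mul_nonneg hn hm
  have hlen0 : (PySem.List.pyRange 0 (n * m) 1).length = (n * m).toNat := by
    rw [PySem.List.length_pyRange_one]; omega
  have hget : ∀ k : Nat, k < (PySem.List.pyRange 0 (n * m) 1).length →
      (PySem.List.pyRange 0 (n * m) 1).getD k 0 = (k : Int) := by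
    intro k hk
    rw [PySem.List.pyRange_one]
    rw [PySem.List.pyRange_one, List.length_map, List.length_range] at hk
    have hk' : k < (n * m).toNat := by omega
    simp [List.getD, hk']
  have hM0 : pvMono (PySem.List.pyRange 0 (n * m) 1) := by
    intro k hk
    rw [hget k hk]
    exact ⟨Int.natCast_nonneg k, le_refl _⟩
  have hE : ∀ e ∈ pvE maps n m,
      pvInR (PySem.List.pyRange 0 (n * m) 1) e.1 ∧ pvInR (PySem.List.pyRange 0 (n * m) 1) e.2 := by
    intro e he
    obtain ⟨c, d, hrd, h1, h2⟩ := (mem_pvE maps n m e.1 e.2).mp he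
    have hc := enc_inR maps n m hrd.1
    have hd := enc_inR maps n m hrd.2.1
    have hcast : ((PySem.List.pyRange 0 (n * m) 1).length : Int) = n * m := by
      rw [hlen0]; omega
    rw [h1, h2]
    exact ⟨⟨hc.1, by omega⟩, ⟨hd.1, by omega⟩⟩
  obtain ⟨hlf, hmf, hiff⟩ := ufFold_eqv (pvE maps n m) (PySem.List.pyRange 0 (n * m) 1) hM0 hE
  have hPdef : pvP maps n m
      = (pvE maps n m).foldl (fun p e => ufUnion p e.1 e.2) (PySem.List.pyRange 0 (n * m) 1) := rfl
  refine ⟨by rw [hPdef, hlf, hlen0], by rw [hPdef]; exact hmf, ?_⟩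
  intro x y hx hy
  rw [show pvF (pvP maps n m) x = pvF (pvP maps n m) y ↔
      Relation.EqvGen (pvPtr (pvP maps n m)) x y from
    findEq_iff_eqv (pvP maps n m) (hPdef ▸ hmf) hx hy]
  rw [hPdef]
  rw [hiff x y]
  constructor
  · refine fun h => eqvGen_sub (fun u v huv => ?_) x y h
    rcases huv with ⟨hu, hv⟩ | huv
    · have : pvPar (PySem.List.pyRange 0 (n * m) 1) u = u := by
        have hu1 := hu.1
        have hu2 := hu.2
        have hlt : u.toNat < (PySem.List.pyRange 0 (n * m) 1).length := by omega
        have := hget u.toNat hlt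
        unfold pvPar
        rw [this]
        omega
      rw [hv, this]
      exact Relation.EqvGen.refl u
    · exact Relation.EqvGen.rel _ _ huv
  · exact fun h => eqvGen_sub (fun u v huv => Relation.EqvGen.rel _ _ (Or.inr huv)) x y h

lemma key_iff_conn (maps : List String) (n m : Int) (hm : 0 ≤ m) (hn : 0 ≤ n)
    {c d : Int × Int} (hc : pvGoodP maps n m c) (hd : pvGoodP maps n m d) :
    pvKey maps n m c = pvKey maps n m d ↔ pvConn maps n m c d := by
  obtain ⟨hlen, hmono, hiff⟩ := pvP_spec maps n m hm hn
  have hnm : 0 ≤ n * m := mul_nonneg hn hm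
  have hcast : ((pvP maps n m).length : Int) = n * m := by rw [hlen]; omega
  have hc' := enc_inR maps n m hc
  have hd' := enc_inR maps n m hd
  have h1 : pvInR (pvP maps n m) (pvEnc m c) := ⟨hc'.1, by omega⟩
  have h2 : pvInR (pvP maps n m) (pvEnc m d) := ⟨hd'.1, by omega⟩
  have := hiff (pvEnc m c) (pvEnc m d) h1 h2
  rw [show pvKey maps n m c = pvF (pvP maps n m) (pvEnc m c) from rfl,
    show pvKey maps n m d = pvF (pvP maps n m) (pvEnc m d) from rfl, this]
  exact eqvE_iff_conn maps n m hc hd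

-- ============ the grouping dict ============

lemma dict_group (key : Int × Int → Int) (v : Int × Int → Int) :
    ∀ (l : List (Int × Int)) (d : PySem.Dict Int Int) (r : Int),
      (l.foldl (fun d c => d.insert (key c) (d.getD (key c) 0 + v c)) d).getD r 0
        = d.getD r 0 + ((l.filter (fun c => decide (key c = r))).map v).sum := by
  intro l
  induction l with
  | nil => intro d r; simp
  | cons c rest ih =>
    intro d r
    rw [List.foldl_cons, ih, PySem.Dict.getD_insert]
    by_cases h : r = key c
    · rw [if_pos h, List.filter_cons_of_pos (by simp [h.symm]), List.map_cons, List.sum_cons, h]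
      ring
    · rw [if_neg h, List.filter_cons_of_neg (by simp; exact fun hh => h hh.symm)]

lemma set_add_prefix : ∀ (ks : List Int) (s : PySem.Set Int),
    ∃ t, ks.foldl PySem.Set.add s = s ++ t := by
  intro ks
  induction ks with
  | nil => exact fun s => ⟨[], by simp⟩
  | cons k ks ih =>
    intro s
    obtain ⟨t, ht⟩ := ih (PySem.Set.add s k)
    rw [List.foldl_cons, ht]
    by_cases hc : k ∈ s
    · exact ⟨t, by rw [show PySem.Set.add s k = s from by simp [PySem.Set.add, hc]]⟩
    · refine ⟨k :: t, ?_⟩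
      rw [show PySem.Set.add s k = s ++ [k] from by simp [PySem.Set.add, hc]]
      simp

lemma set_add_of_mem {s : PySem.Set Int} {k : Int} (h : k ∈ s) : PySem.Set.add s k = s := by
  simp [PySem.Set.add, h]

lemma set_add_of_not_mem {s : PySem.Set Int} {k : Int} (h : k ∉ s) :
    PySem.Set.add s k = s ++ [k] := by
  simp [PySem.Set.add, h]

-- A's component-fold output = B's grouped values, by joint induction
lemma jointFold (key : Int × Int → Int) (g : Int → Int)
    (compF : Int × Int → Finset (Int × Int)) (val : Int × Int → Int)
    (good : Int × Int → Prop)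
    (hg : ∀ c, good c → (∑ x ∈ compF c, val x) = g (key c))
    (hcomp : ∀ c d, good c → good d → (d ∈ compF c ↔ key d = key c)) :
    ∀ (l : List (Int × Int)) (V : Finset (Int × Int)) (S : PySem.Set Int) (out : List Int),
      (∀ c ∈ l, good c) →
      (∀ c, good c → (c ∈ V ↔ key c ∈ S)) →
      (l.foldl (fun (st : Finset (Int × Int) × List Int) c =>
          if c ∉ st.1 then (st.1 ∪ compF c, st.2 ++ [∑ x ∈ compF c, val x]) else st) (V, out)).2
        = out ++ (((l.map key).foldl PySem.Set.add S).drop S.length).map g := by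
  intro l
  induction l with
  | nil => intro V S out _ _; simp
  | cons c rest ih =>
    intro V S out hgood hinv
    have hc := hgood c List.mem_cons_self
    rw [List.foldl_cons, List.map_cons, List.foldl_cons]
    by_cases hmv : c ∈ V
    · rw [if_neg (by simpa using hmv), set_add_of_mem ((hinv c hc).mp hmv)]
      exact ih V S out (fun x hx => hgood x (List.mem_cons_of_mem _ hx)) hinv
    · rw [if_pos (by simpa using hmv)]
      have hkS : key c ∉ S := fun h => hmv ((hinv c hc).mpr h)
      have hinv' : ∀ x, good x → (x ∈ V ∪ compF c ↔ key x ∈ S ++ [key c]) := by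
        intro x hx
        rw [Finset.mem_union, List.mem_append, List.mem_singleton]
        constructor
        · rintro (h | h)
          · exact Or.inl ((hinv x hx).mp h)
          · exact Or.inr ((hcomp c x hc hx).mp h)
        · rintro (h | h)
          · exact Or.inl ((hinv x hx).mpr h)
          · exact Or.inr ((hcomp c x hc hx).mpr h)
      rw [set_add_of_not_mem hkS,
        ih (V ∪ compF c) (S ++ [key c]) (out ++ [∑ x ∈ compF c, val x])
          (fun x hx => hgood x (List.mem_cons_of_mem _ hx)) hinv']
      obtain ⟨t, ht⟩ := set_add_prefix (rest.map key) (S ++ [key c])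
      rw [ht, List.drop_left, hg c hc]

      rw [show ((S ++ [key c]) ++ t).drop S.length = [key c] ++ t from by
        rw [List.append_assoc]
        exact List.drop_left]
      simp

-- the common value list: one grouped component sum per root, in first-cell scan order
def pvG (maps : List String) (n m : Int) (r : Int) : Int :=
  (((pvGCells maps n m).filter (fun c => decide (pvKey maps n m c = r))).map
    (fun c => pvVal maps c.1 c.2)).sum

def pvL (maps : List String) (n m : Int) : List Int :=
  (PySem.Set.ofList ((pvGCells maps n m).map (pvKey maps n m))).map (pvG maps n m)

lemma conn_symm (maps : List String) (n m : Int) : Symmetric (pvConn maps n m) :=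
  Relation.ReflTransGen.symmetric (pvAdj_symm maps n m)

lemma hcomp_key (maps : List String) (n m : Int) (hm : 0 ≤ m) (hn : 0 ≤ n) :
    ∀ c d : Int × Int, pvGoodP maps n m c → pvGoodP maps n m d →
      (d ∈ pvCompF maps n m c ↔ pvKey maps n m d = pvKey maps n m c) := by
  intro c d hc hd
  rw [mem_pvCompF maps n m hc, key_iff_conn maps n m hm hn hd hc]
  exact ⟨fun h => conn_symm maps n m h, fun h => conn_symm maps n m h⟩

lemma hsum_key (maps : List String) (n m : Int) (hm : 0 ≤ m) (hn : 0 ≤ n) :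
    ∀ c : Int × Int, pvGoodP maps n m c →
      (∑ x ∈ pvCompF maps n m c, pvVal maps x.1 x.2) = pvG maps n m (pvKey maps n m c) := by
  classical
  intro c hc
  unfold pvG
  have hfe : (pvGCells maps n m).filter (fun x => decide (pvKey maps n m x = pvKey maps n m c))
      = (pvGCells maps n m).filter (fun x => decide (pvConn maps n m c x)) := by
    refine List.filter_congr (fun x hx => ?_)
    rw [decide_eq_decide]
    rw [key_iff_conn maps n m hm hn ((mem_pvGCells maps n m x).mp hx) hc]
    exact ⟨fun h => conn_symm maps n m h, fun h => conn_symm maps n m h⟩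
  rw [hfe]
  have hnd : ((pvGCells maps n m).filter (fun x => decide (pvConn maps n m c x))).Nodup :=
    (nodup_pvGCells maps n m).filter _
  have hts : ((pvGCells maps n m).filter
      (fun x => decide (pvConn maps n m c x))).toFinset = pvCompF maps n m c := by
    ext x
    rw [List.mem_toFinset, List.mem_filter, decide_eq_true_eq, mem_pvCompF maps n m hc]
    constructor
    · exact fun h => h.2
    · intro h
      exact ⟨(mem_pvGCells maps n m x).mpr (conn_good maps n m h hc), h⟩
  rw [← hts, List.sum_toFinset _ hnd]

lemma A_fold_char (maps : List String) (n m : Int) (hn : 0 ≤ n) (hm : 0 ≤ m) :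
    ((PySem.List.pyRange 0 n 1).foldl
      (fun (st : Finset (Int × Int) × List Int) i =>
        (PySem.List.pyRange 0 m 1).foldl
          (fun (st : Finset (Int × Int) × List Int) j =>
            if (i, j) ∉ st.1 ∧ pvCharAt maps i j ≠ 'X' then
              let r := pvBfs maps n m st.1 i j
              (r.2, st.2 ++ [r.1])
            else st) st) ((∅ : Finset (Int × Int)), ([] : List Int))).2
      = pvL maps n m := by
  classical
  have h1 : (PySem.List.pyRange 0 n 1).foldl
      (fun (st : Finset (Int × Int) × List Int) i =>
        (PySem.List.pyRange 0 m 1).foldl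
          (fun (st : Finset (Int × Int) × List Int) j =>
            if (i, j) ∉ st.1 ∧ pvCharAt maps i j ≠ 'X' then
              let r := pvBfs maps n m st.1 i j
              (r.2, st.2 ++ [r.1])
            else st) st) ((∅ : Finset (Int × Int)), ([] : List Int))
      = (PySem.List.pyRange 0 n 1).foldl
        (fun (st : Finset (Int × Int) × List Int) i =>
          (PySem.List.pyRange 0 m 1).foldl
            (fun (st : Finset (Int × Int) × List Int) j => pvCanon maps n m st i j) st)
        ((∅ : Finset (Int × Int)), ([] : List Int)) := by
    apply PySem.List.foldl_congr_mem
    intro st i hi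
    apply PySem.List.foldl_congr_mem
    intro st' j hj
    exact bodyA_eq maps n m i j hi hj st'
  rw [h1]
  have h2 : (PySem.List.pyRange 0 n 1).foldl
      (fun (st : Finset (Int × Int) × List Int) i =>
        (PySem.List.pyRange 0 m 1).foldl
          (fun (st : Finset (Int × Int) × List Int) j => pvCanon maps n m st i j) st)
      ((∅ : Finset (Int × Int)), ([] : List Int))
      = (pvCells n m).foldl (fun st c => pvCanon maps n m st c.1 c.2)
        ((∅ : Finset (Int × Int)), ([] : List Int)) := by
    rw [pvCells, List.foldl_flatMap]
    simp only [List.foldl_map]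
  rw [h2]
  have h3 : (pvCells n m).foldl (fun st c => pvCanon maps n m st c.1 c.2)
        ((∅ : Finset (Int × Int)), ([] : List Int))
      = (pvCells n m).foldl (fun st c =>
          if c ∉ st.1 ∧ pvCharAt maps c.1 c.2 ≠ 'X' then
            (st.1 ∪ pvCompF maps n m c, st.2 ++ [∑ x ∈ pvCompF maps n m c, pvVal maps x.1 x.2])
          else st)
        ((∅ : Finset (Int × Int)), ([] : List Int)) := by
    refine foldl_inv_congr (fun st => pvClosed maps n m st.1) _ _ _ _ ?_ ?_
    · intro x hx d _
      exact absurd hx (Finset.notMem_empty x)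
    · intro st c hP hc
      obtain ⟨hb1, hb2, hb3, hb4⟩ := (mem_pvCells n m c).mp hc
      by_cases hcond : c ∉ st.1 ∧ pvCharAt maps c.1 c.2 ≠ 'X'
      · have hg : pvGoodP maps n m c := ⟨hb1, hb2, hb3, hb4, hcond.2⟩
        have hRF : pvRF maps n m (insert c st.1) [c] = pvCompF maps n m c :=
          pvRF_eq_compF maps n m hP hg hcond.1
        have hcm : c ∈ pvCompF maps n m c :=
          (mem_pvCompF maps n m hg c).mpr Relation.ReflTransGen.refl
        have hVeq : insert c st.1 ∪ pvCompF maps n m c = st.1 ∪ pvCompF maps n m c := by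
          rw [Finset.insert_union, Finset.insert_eq_self.mpr (Finset.mem_union_right _ hcm)]
        constructor
        · show pvCanon maps n m st c.1 c.2 = _
          unfold pvCanon
          rw [if_pos (by exact hcond), if_pos hcond]
          rw [show ((c.1, c.2) : Int × Int) = c from rfl, hRF, hVeq]
        · show pvClosed maps n m (pvCanon maps n m st c.1 c.2).1
          unfold pvCanon
          rw [if_pos (by exact hcond)]
          show pvClosed maps n m (insert c st.1 ∪ pvRF maps n m (insert c st.1) [c])
          rw [hRF, hVeq]
          exact closed_union_compF maps n m hP hg
      · constructor
        · show pvCanon maps n m st c.1 c.2 = _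
          unfold pvCanon
          rw [if_neg (by exact hcond), if_neg hcond]
        · show pvClosed maps n m (pvCanon maps n m st c.1 c.2).1
          unfold pvCanon
          rw [if_neg (by exact hcond)]
          exact hP
  rw [h3]
  have h4 : (pvCells n m).foldl (fun st c =>
          if c ∉ st.1 ∧ pvCharAt maps c.1 c.2 ≠ 'X' then
            (st.1 ∪ pvCompF maps n m c, st.2 ++ [∑ x ∈ pvCompF maps n m c, pvVal maps x.1 x.2])
          else st)
        ((∅ : Finset (Int × Int)), ([] : List Int))
      = (pvCells n m).foldl (fun st c =>
          if pvGoodP maps n m c then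
            (if c ∉ st.1 then
              (st.1 ∪ pvCompF maps n m c, st.2 ++ [∑ x ∈ pvCompF maps n m c, pvVal maps x.1 x.2])
             else st)
          else st)
        ((∅ : Finset (Int × Int)), ([] : List Int)) := by
    apply PySem.List.foldl_congr_mem
    intro st c hc
    obtain ⟨hb1, hb2, hb3, hb4⟩ := (mem_pvCells n m c).mp hc
    by_cases hgd : pvGoodP maps n m c
    · rw [if_pos hgd]
      by_cases hv : c ∉ st.1
      · rw [if_pos ⟨hv, hgd.2.2.2.2⟩, if_pos hv]
      · rw [if_neg (fun hh => hv hh.1), if_neg hv]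
    · rw [if_neg hgd, if_neg (fun hh => hgd ⟨hb1, hb2, hb3, hb4, hh.2⟩)]
  rw [h4, PySem.List.foldl_ite_eq_foldl_filter]
  have h5 := jointFold (pvKey maps n m) (pvG maps n m) (pvCompF maps n m)
    (fun c => pvVal maps c.1 c.2) (pvGoodP maps n m)
    (hsum_key maps n m hm hn) (hcomp_key maps n m hm hn)
    (pvGCells maps n m) ∅ [] []
    (fun c hc => (mem_pvGCells maps n m c).mp hc)
    (fun c _ => by simp)
  rw [show (pvCells n m).filter (fun c => decide (pvGoodP maps n m c)) = pvGCells maps n m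
    from rfl]
  rw [h5]
  simp only [List.nil_append, List.length_nil, List.drop_zero]
  rfl

lemma B_parent_char (maps : List String) (n m : Int) :
    (PySem.List.pyRange 0 n 1).foldl (fun (p : List Int) i =>
      (PySem.List.pyRange 0 m 1).foldl (fun (p : List Int) j =>
        if pvCharAt maps i j ≠ 'X' then
          let p := if j + 1 < m ∧ pvCharAt maps i (j + 1) ≠ 'X'
            then ufUnion p (i * m + j) (i * m + j + 1) else p
          if i + 1 < n ∧ pvCharAt maps (i + 1) j ≠ 'X'
            then ufUnion p (i * m + j) ((i + 1) * m + j) else p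
        else p) p) (PySem.List.pyRange 0 (n * m) 1)
      = pvP maps n m := by
  have h2 : pvP maps n m
      = (pvCells n m).foldl (fun p c => (pvEdgesOf maps n m c).foldl
          (fun (p : List Int) e => ufUnion p e.1 e.2) p) (PySem.List.pyRange 0 (n * m) 1) := by
    rw [pvP, pvE, List.foldl_flatMap]
  rw [h2, pvCells, List.foldl_flatMap]
  simp only [List.foldl_map]
  apply PySem.List.foldl_congr_mem
  intro p i hi
  apply PySem.List.foldl_congr_mem
  intro p' j hj
  obtain ⟨hi1, hi2⟩ := PySem.List.mem_pyRange_one.mp hi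
  obtain ⟨hj1, hj2⟩ := PySem.List.mem_pyRange_one.mp hj
  rw [pvEdgesOf]
  by_cases h0 : pvCharAt maps i j ≠ 'X'
  · rw [if_pos h0]
    have hgc : pvGoodP maps n m (i, j) := ⟨hi1, hi2, hj1, hj2, h0⟩
    have hrr : (pvGoodP maps n m ((i, j).1, (i, j).2 + 1))
        ↔ (j + 1 < m ∧ pvCharAt maps i (j + 1) ≠ 'X') := by
      constructor
      · exact fun h => ⟨h.2.2.2.1, h.2.2.2.2⟩
      · exact fun h => ⟨hi1, hi2, by omega, h.1, h.2⟩
    have hdd : (pvGoodP maps n m ((i, j).1 + 1, (i, j).2))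
        ↔ (i + 1 < n ∧ pvCharAt maps (i + 1) j ≠ 'X') := by
      constructor
      · exact fun h => ⟨h.2.1, h.2.2.2.2⟩
      · exact fun h => ⟨by omega, h.1, hj1, hj2, h.2⟩
    have hencr : pvEnc m ((i, j).1, (i, j).2 + 1) = i * m + j + 1 := by
      show i * m + (j + 1) = i * m + j + 1
      ring
    have hencd : pvEnc m ((i, j).1 + 1, (i, j).2) = (i + 1) * m + j := rfl
    have harith : i * m + (j + 1) = i * m + j + 1 := by ring
    by_cases hr : j + 1 < m ∧ pvCharAt maps i (j + 1) ≠ 'X' <;>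
      by_cases hd2 : i + 1 < n ∧ pvCharAt maps (i + 1) j ≠ 'X'
    · rw [if_pos hr, if_pos hd2, if_pos ⟨hgc, hrr.mpr hr⟩, if_pos ⟨hgc, hdd.mpr hd2⟩]
      simp only [List.singleton_append, List.foldl_cons, List.foldl_nil, pvEnc, harith]
    · rw [if_pos hr, if_neg hd2, if_pos ⟨hgc, hrr.mpr hr⟩,
        if_neg (fun hh => hd2 (hdd.mp hh.2))]
      simp only [List.append_nil, List.foldl_cons, List.foldl_nil, pvEnc, harith]
    · rw [if_neg hr, if_pos hd2, if_neg (fun hh => hr (hrr.mp hh.2)),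
        if_pos ⟨hgc, hdd.mpr hd2⟩]
      simp only [List.nil_append, List.foldl_cons, List.foldl_nil, pvEnc]
    · rw [if_neg hr, if_neg hd2, if_neg (fun hh => hr (hrr.mp hh.2)),
        if_neg (fun hh => hd2 (hdd.mp hh.2))]
      rfl
  · rw [if_neg h0,
      if_neg (fun hh : pvGoodP maps n m (i, j) ∧ _ => h0 hh.1.2.2.2.2),
      if_neg (fun hh : pvGoodP maps n m (i, j) ∧ _ => h0 hh.1.2.2.2.2)]
    rfl

lemma B_sums_char (maps : List String) (n m : Int) :
    (PySem.List.pyRange 0 n 1).foldl (fun (d : PySem.Dict Int Int) i =>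
      (PySem.List.pyRange 0 m 1).foldl (fun (d : PySem.Dict Int Int) j =>
        if pvCharAt maps i j ≠ 'X' then
          let r := ufFind (pvP maps n m) (pvP maps n m).length (i * m + j)
          d.insert r (d.getD r 0 + pvVal maps i j)
        else d) d) PySem.Dict.empty
      = (pvGCells maps n m).foldl (fun d c =>
          d.insert (pvKey maps n m c) (d.getD (pvKey maps n m c) 0 + pvVal maps c.1 c.2))
        PySem.Dict.empty := by
  have h2 : (PySem.List.pyRange 0 n 1).foldl (fun (d : PySem.Dict Int Int) i =>
      (PySem.List.pyRange 0 m 1).foldl (fun (d : PySem.Dict Int Int) j =>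
        if pvCharAt maps i j ≠ 'X' then
          let r := ufFind (pvP maps n m) (pvP maps n m).length (i * m + j)
          d.insert r (d.getD r 0 + pvVal maps i j)
        else d) d) PySem.Dict.empty
      = (pvCells n m).foldl (fun (d : PySem.Dict Int Int) c =>
          if pvCharAt maps c.1 c.2 ≠ 'X' then
            d.insert (pvKey maps n m c) (d.getD (pvKey maps n m c) 0 + pvVal maps c.1 c.2)
          else d) PySem.Dict.empty := by
    rw [pvCells, List.foldl_flatMap]
    simp only [List.foldl_map]
    rfl
  rw [h2]
  have h3 : (pvCells n m).foldl (fun (d : PySem.Dict Int Int) c =>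
        if pvCharAt maps c.1 c.2 ≠ 'X' then
          d.insert (pvKey maps n m c) (d.getD (pvKey maps n m c) 0 + pvVal maps c.1 c.2)
        else d) PySem.Dict.empty
      = (pvCells n m).foldl (fun (d : PySem.Dict Int Int) c =>
        if pvGoodP maps n m c then
          d.insert (pvKey maps n m c) (d.getD (pvKey maps n m c) 0 + pvVal maps c.1 c.2)
        else d) PySem.Dict.empty := by
    apply PySem.List.foldl_congr_mem
    intro d c hc
    obtain ⟨hb1, hb2, hb3, hb4⟩ := (mem_pvCells n m c).mp hc
    by_cases hch : pvCharAt maps c.1 c.2 ≠ 'X'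
    · rw [if_pos hch, if_pos ⟨hb1, hb2, hb3, hb4, hch⟩]
    · rw [if_neg hch, if_neg (fun hh => hch hh.2.2.2.2)]
  rw [h3, PySem.List.foldl_ite_eq_foldl_filter]
  rfl

lemma B_values (maps : List String) (n m : Int) :
    ((pvGCells maps n m).foldl (fun d c =>
        d.insert (pvKey maps n m c) (d.getD (pvKey maps n m c) 0 + pvVal maps c.1 c.2))
      PySem.Dict.empty).values = pvL maps n m := by
  have hnd : ((pvGCells maps n m).foldl (fun d c =>
      d.insert (pvKey maps n m c) (d.getD (pvKey maps n m c) 0 + pvVal maps c.1 c.2))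
      PySem.Dict.empty).keys.Nodup :=
    PySem.Dict.nodup_keys_foldl_insert_key _ _ _ _ PySem.Dict.nodup_keys_empty
  rw [PySem.Dict.values_eq_map_keys _ hnd 0]
  rw [PySem.Dict.keys_foldl_insert_key]
  rw [PySem.Dict.keys_empty]
  have hkeys : PySem.Set.update ([] : PySem.Set Int) ((pvGCells maps n m).map (pvKey maps n m))
      = PySem.Set.ofList ((pvGCells maps n m).map (pvKey maps n m)) := rfl
  rw [hkeys, pvL]
  refine List.map_congr_left (fun r _ => ?_)
  rw [dict_group (pvKey maps n m) (fun c => pvVal maps c.1 c.2) (pvGCells maps n m)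
    PySem.Dict.empty r]
  rw [PySem.Dict.getD_empty, zero_add]
  rfl

-- A's program value, characterised
lemma A_char (maps : List String) :
    solution maps =
      (if pvL maps (maps.length : Int) (PySem.Str.len ((PySem.List.pyGet? maps 0).getD "")) = []
       then [-1]
       else PySem.List.sorted
         (pvL maps (maps.length : Int) (PySem.Str.len ((PySem.List.pyGet? maps 0).getD "")))
         (fun v => v) false) := by
  have hn : (0 : Int) ≤ (maps.length : Int) := Int.natCast_nonneg _
  have hm : (0 : Int) ≤ PySem.Str.len ((PySem.List.pyGet? maps 0).getD "") := by
    rw [PySem.Str.len_eq]; exact Int.natCast_nonneg _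
  simp only [solution]
  rw [A_fold_char maps _ _ hn hm]

-- B's program value, characterised
lemma B_char (maps : List String) :
    solution_alt maps =
      (if pvL maps (maps.length : Int) (PySem.Str.len ((PySem.List.pyGet? maps 0).getD "")) = []
       then [-1]
       else PySem.List.sorted
         (pvL maps (maps.length : Int) (PySem.Str.len ((PySem.List.pyGet? maps 0).getD "")))
         (fun v => v) false) := by
  simp only [solution_alt]
  rw [B_parent_char, B_sums_char, B_values]
  by_cases hL : pvL maps (maps.length : Int)
      (PySem.Str.len ((PySem.List.pyGet? maps 0).getD "")) = []
  · rw [if_pos hL, hL]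
    rfl
  · rw [if_neg hL]
    have hlen : (PySem.List.sorted (pvL maps (maps.length : Int)
        (PySem.Str.len ((PySem.List.pyGet? maps 0).getD ""))) (fun v => v) false).length
        = (pvL maps (maps.length : Int)
            (PySem.Str.len ((PySem.List.pyGet? maps 0).getD ""))).length :=
      PySem.List.length_sorted ..
    rw [if_pos (fun hh => hL (by
      have := hlen
      rw [hh] at this
      exact List.eq_nil_of_length_eq_zero this.symm))]

-- ===== VERDICT (by name: the statement is the Claim_ definition above) =====
theorem solution_spec : Claim_equal_solution := by
  intro maps _ _
  rw [Spec_solution, A_char, B_char]
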